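-- pv_equiv track=rewrite | github.com/tony-728/Algorithm | python/programmers/Lev2/석유시추.py | solution
-- ===== SOURCE A (Python) =====
-- from collections import deque
--
-- def solution(land):
--     def bfs(y: int, x: int, oil: int) -> tuple:
--         """
--         연결되어 있는 석유량 확인
--
--         Args:
--             y: 세로
--             x: 가로
--             oil: 초기 석유량
--
--         Returns:
--             oil: 총 연결되어 있는 석유량
--             move_right: 연결되어 있는 석유의 가로 인덱스
--         """
--         dx = [-1, 1, 0, 0]
--         dy = [0, 0, -1, 1]
--
--         q = deque()
--         q.append((y, x))
--
--         move_right = set()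
--
--         while q:
--             y, x = q.popleft()
--
--             for i in range(4):
--                 new_x = x + dx[i]
--                 new_y = y + dy[i]
--
--                 if -1 < new_y < n and -1 < new_x < m:
--                     if not visited[new_y][new_x]:
--                         visited[new_y][new_x] = True
--
--                         if land[new_y][new_x]:
--                             oil += 1
--                             q.append((new_y, new_x))
--                             move_right.add(new_x)
--
--         return oil, move_right
--
--     n = len(land)
--     m = len(land[0])
--
--     answer = 0
--     result = [0 for _ in range(m)]
--
--     visited = [[False for _ in range(m)] for _ in range(n)]
--
--     for x in range(m):  # 가로
--         for y in range(n):  # 세로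
--             if not visited[y][x]:
--                 visited[y][x] = True
--
--                 # 석유가 있으면 bfs
--                 if land[y][x]:
--                     oil, move_right = bfs(y, x, 1)
--                     result[x] += oil
--
--                     # 가로로 연결되어 있는 만큼 추가
--                     for mr in move_right:
--                         if mr != x:
--                             result[mr] += oil
--
--     answer = max(result)
--     return answer
-- ===== SOURCE B (Python) =====
-- def solution(land):
--     n = len(land)
--     m = len(land[0])
--     parent = list(range(n * m))
--
--     def find(i):
--         while parent[i] != i:
--             i = parent[i]
--         return i
--
--     def union(a, b):
--         ra, rb = find(a), find(b)
--         if ra != rb: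
--             if ra < rb:
--                 parent[rb] = ra
--             else:
--                 parent[ra] = rb
--
--     for y in range(n):
--         for x in range(m):
--             if land[y][x]:
--                 if x + 1 < m and land[y][x + 1]:
--                     union(y * m + x, y * m + x + 1)
--                 if y + 1 < n and land[y + 1][x]:
--                     union(y * m + x, (y + 1) * m + x)
--
--     size = {}
--     cols = {}
--     for y in range(n):
--         for x in range(m):
--             if land[y][x]:
--                 r = find(y * m + x)
--                 size[r] = size.get(r, 0) + 1
--                 cols.setdefault(r, set()).add(x)
--
--     result = [0] * m
--     for r, s in size.items():
--         for c in cols[r]: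
--             result[c] += s
--
--     return max(result)
-- ===== Notes on version B (the rewrite author's own statement) =====
-- stated objective: alternative
-- what changed: Replaces A's column-major BFS flood fill (deque + visited matrix, per-component column set collected during traversal) by a disjoint-set union over flat cell indices: union each oil cell with its right/down oil neighbour, then group oil cells by root to get each component's size and column set and sum per column.
import Mathlib
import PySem

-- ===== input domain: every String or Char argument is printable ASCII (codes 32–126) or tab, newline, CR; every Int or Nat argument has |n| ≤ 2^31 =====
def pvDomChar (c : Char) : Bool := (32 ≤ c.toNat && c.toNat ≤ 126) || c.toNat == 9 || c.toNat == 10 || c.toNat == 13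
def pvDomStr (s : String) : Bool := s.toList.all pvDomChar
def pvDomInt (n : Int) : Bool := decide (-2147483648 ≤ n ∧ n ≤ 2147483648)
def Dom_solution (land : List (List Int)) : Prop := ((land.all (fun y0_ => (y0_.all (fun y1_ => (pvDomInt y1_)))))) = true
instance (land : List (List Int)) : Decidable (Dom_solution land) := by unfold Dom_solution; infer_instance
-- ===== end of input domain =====

-- B replaces A's column-major BFS flood fill by union-find over cell indices (alternative algorithm, similar cost);
-- equivalence is about the return value (neither Python mutates its argument).

-- land[y][x] for 0 ≤ y, 0 ≤ x; both Pythons only index in range (rows ≥ len(land[0]) on Pre_), where getD is exact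
def landAt (land : List (List Int)) (y x : Nat) : Int := (land.getD y []).getD x 0

-- max(xs): Python raises ValueError on []; Pre_ guarantees xs ≠ [] at every call, where this is exact
def pymax (xs : List Int) : Int := (PySem.List.max? xs (fun v => v)).getD 0

-- ===== PORT A =====
-- visited[y][x]; dims are exactly n×m and reads are guarded in range, so the default is never hit
def visAt (vis : List (List Bool)) (y x : Nat) : Bool := (vis.getD y []).getD x true

def visMark (vis : List (List Bool)) (y x : Nat) : List (List Bool) :=
  vis.modify y (fun row => row.set x true)

def unvis (vis : List (List Bool)) : Nat := (vis.map (fun row => row.count false)).sum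

abbrev BfsSt := List (List Bool) × List (Int × Int) × Int × PySem.Set Int

-- one direction i of A's inner `for i in range(4)` body
def bfsStep (land : List (List Int)) (n m : Int) (yx : Int × Int) (st : BfsSt) (i : Nat) : BfsSt :=
  let dx : List Int := [-1, 1, 0, 0]
  let dy : List Int := [0, 0, -1, 1]
  let nx := yx.2 + dx.getD i 0
  let ny := yx.1 + dy.getD i 0
  if -1 < ny ∧ ny < n ∧ -1 < nx ∧ nx < m then
    if visAt st.1 ny.toNat nx.toNat = false then
      let vis' := visMark st.1 ny.toNat nx.toNat
      if landAt land ny.toNat nx.toNat ≠ 0 then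
        (vis', st.2.1 ++ [(ny, nx)], st.2.2.1 + 1, st.2.2.2.add nx)
      else (vis', st.2.1, st.2.2.1, st.2.2.2)
    else st
  else st

theorem count_set_false (row : List Bool) (x : Nat) (h : row.getD x true = false) :
    (row.set x true).count false + 1 = row.count false := by
  induction row generalizing x with
  | nil => simp at h
  | cons b t ih =>
    cases x with
    | zero => simp_all
    | succ k =>
      simp only [List.getD, List.getElem?_cons_succ] at h
      have := ih k h
      simp [List.count_cons]
      omega

theorem unvis_mark (vis : List (List Bool)) (y x : Nat) (h : visAt vis y x = false) :
    unvis (visMark vis y x) + 1 = unvis vis := by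
  unfold visAt at h
  unfold visMark unvis
  induction vis generalizing y with
  | nil => simp at h
  | cons r t ih =>
    cases y with
    | zero =>
      simp only [List.getD, List.getElem?_cons_zero, Option.getD_some] at h
      have := count_set_false r x h
      simp [List.modify]
      omega
    | succ k =>
      simp only [List.getD, List.getElem?_cons_succ] at h
      have := ih k h
      simp only [List.modify] at this ⊢
      simp at this ⊢
      omega

theorem bfsStep_measure (land : List (List Int)) (n m : Int) (yx : Int × Int) (st : BfsSt) (i : Nat) :
    2 * unvis (bfsStep land n m yx st i).1 + (bfsStep land n m yx st i).2.1.length ≤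
      2 * unvis st.1 + st.2.1.length := by
  unfold bfsStep
  dsimp only
  split_ifs with h1 h2 h3
  · have hm := unvis_mark st.1 _ _ h2
    simp at hm ⊢
    omega
  · have hm := unvis_mark st.1 _ _ h2
    simp at hm ⊢
    omega
  · exact le_refl _
  · exact le_refl _

theorem bfsFold_measure (land : List (List Int)) (n m : Int) (yx : Int × Int) (st : BfsSt) (l : List Nat) :
    2 * unvis (l.foldl (bfsStep land n m yx) st).1 + (l.foldl (bfsStep land n m yx) st).2.1.length ≤
      2 * unvis st.1 + st.2.1.length := by
  induction l generalizing st with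
  | nil => simp
  | cons a t ih => exact le_trans (ih _) (bfsStep_measure land n m yx st a)

-- A's `while q:` loop
def bfsLoop (land : List (List Int)) (n m : Int) (q : List (Int × Int)) (vis : List (List Bool))
    (oil : Int) (mr : PySem.Set Int) : Int × PySem.Set Int × List (List Bool) :=
  match q with
  | [] => (oil, mr, vis)
  | yx :: qt =>
      let st := (List.range 4).foldl (bfsStep land n m yx) (vis, qt, oil, mr)
      bfsLoop land n m st.2.1 st.1 st.2.2.1 st.2.2.2
termination_by 2 * unvis vis + q.length
decreasing_by
  calc 2 * unvis ((List.range 4).foldl (bfsStep land n m yx) (vis, qt, oil, mr)).1 +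
        ((List.range 4).foldl (bfsStep land n m yx) (vis, qt, oil, mr)).2.1.length
      ≤ 2 * unvis vis + qt.length := bfsFold_measure land n m yx (vis, qt, oil, mr) (List.range 4)
    _ < 2 * unvis vis + (qt.length + 1) := by omega

-- body of A's double scan `for x in range(m): for y in range(n): ...` at position (y, x)
def outerStep (land : List (List Int)) (st : List Int × List (List Bool)) (y x : Nat) :
    List Int × List (List Bool) :=
  if visAt st.2 y x = false then
    let vis1 := visMark st.2 y x
    if landAt land y x ≠ 0 then
      let r := bfsLoop land (land.length : Int) ((land.headD []).length : Int) [((y : Int), (x : Int))] vis1 1 PySem.Set.empty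
      let res1 := st.1.modify x (fun v => v + r.1)
      -- `result[mr] += oil` for mr in move_right: members of mr are enqueued columns, 0 ≤ mr < m
      let res2 := r.2.1.foldl (fun res c => if c ≠ (x : Int) then res.modify c.toNat (fun v => v + r.1) else res) res1
      (res2, r.2.2)
    else (st.1, vis1)
  else st

def solution (land : List (List Int)) : Int :=
  let n := land.length
  let m := (land.headD []).length
  let vis0 := List.replicate n (List.replicate m false)
  let res0 := List.replicate m (0 : Int)
  let fin := (List.range m).foldl (fun st x =>
      (List.range n).foldl (fun st y => outerStep land st y x) st) (res0, vis0)
  pymax fin.1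

-- ===== PORT B =====
-- `while parent[i] != i: i = parent[i]` — exact: union only ever sets parent[larger root] := smaller root,
-- so parent[i] ≤ i throughout and the walk is exactly this descent
def ufFind (parent : List Nat) (i : Nat) : Nat :=
  let p := parent.getD i i
  if _h : p < i then ufFind parent p else i
termination_by i

def ufUnion (parent : List Nat) (a b : Nat) : List Nat :=
  let ra := ufFind parent a
  let rb := ufFind parent b
  if ra = rb then parent
  else if ra < rb then parent.set rb ra
  else parent.set ra rb

def buildParent (land : List (List Int)) (n m : Nat) : List Nat :=
  (List.range n).foldl (fun par y =>
    (List.range m).foldl (fun par x =>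
      if landAt land y x ≠ 0 then
        let par := if x + 1 < m ∧ landAt land y (x + 1) ≠ 0 then ufUnion par (y * m + x) (y * m + x + 1) else par
        if y + 1 < n ∧ landAt land (y + 1) x ≠ 0 then ufUnion par (y * m + x) ((y + 1) * m + x) else par
      else par) par) (List.range (n * m))

abbrev GSt := PySem.Dict Nat Int × PySem.Dict Nat (PySem.Set Nat)

-- body of B's grouping scan at cell (y, x): bump the root's size, record the column
def grpStep (land : List (List Int)) (parent : List Nat) (m : Nat) (st : GSt) (y x : Nat) : GSt :=
  if landAt land y x ≠ 0 then
    let r := ufFind parent (y * m + x)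
    (st.1.insert r (st.1.getD r 0 + 1), st.2.insert r ((st.2.getD r PySem.Set.empty).add x))
  else st

def solution_alt (land : List (List Int)) : Int :=
  let n := land.length
  let m := (land.headD []).length
  let parent := buildParent land n m
  let grp := (List.range n).foldl (fun st y =>
      (List.range m).foldl (fun st x => grpStep land parent m st y x) st)
      ((PySem.Dict.empty : PySem.Dict Nat Int), (PySem.Dict.empty : PySem.Dict Nat (PySem.Set Nat)))
  let res0 := List.replicate m (0 : Int)
  let res := grp.1.items.foldl (fun res rs =>
      (grp.2.getD rs.1 PySem.Set.empty).foldl (fun res c => res.modify c (fun v => v + rs.2)) res) res0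
  pymax res

-- ===== PRECONDITION & SPEC =====
-- Pre_ is exactly where Python A returns normally: it raises IndexError when land is [] or some row is
-- shorter than row 0 (len(land[0]) columns are indexed in every row), and ValueError (max of an empty
-- list) when row 0 is empty; B raises in the same situations.
def Pre_solution (land : List (List Int)) : Prop :=
  0 < (land.headD []).length ∧ ∀ row ∈ land, (land.headD []).length ≤ row.length
instance (land : List (List Int)) : Decidable (Pre_solution land) := by unfold Pre_solution; infer_instance
def pvWitness_solution : List (List Int) := [[1, 0], [1, 1]]

def Spec_solution (land : List (List Int)) (out : Int) : Prop := out = solution_alt land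
instance (land : List (List Int)) (out : Int) : Decidable (Spec_solution land out) := by unfold Spec_solution; infer_instance

-- ===== CLAIM (what is proved, stated in full; the proofs are below) =====
def Claim_equal_solution : Prop := ∀ (land : List (List Int)), Dom_solution land → Pre_solution land → Spec_solution land (solution land)

-- ===== LEMMAS AND PROOFS =====

-- ---------- shared spec: oil cells, 4-adjacency, connectivity, per-column component counts ----------

def NbrP (p b : Nat × Nat) : Prop :=
  (p.1 = b.1 ∧ (p.2 + 1 = b.2 ∨ b.2 + 1 = p.2)) ∨ (p.2 = b.2 ∧ (p.1 + 1 = b.1 ∨ b.1 + 1 = p.1))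

def OilP (land : List (List Int)) (p : Nat × Nat) : Prop :=
  p.1 < land.length ∧ p.2 < (land.headD []).length ∧ landAt land p.1 p.2 ≠ 0

def AdjO (land : List (List Int)) (p b : Nat × Nat) : Prop := OilP land p ∧ OilP land b ∧ NbrP p b

def ConnO (land : List (List Int)) : Nat × Nat → Nat × Nat → Prop := Relation.ReflTransGen (AdjO land)

def TouchO (land : List (List Int)) (s : Nat × Nat) (c : Nat) : Prop :=
  ∃ q, OilP land q ∧ ConnO land s q ∧ q.2 = c

noncomputable def specCol (land : List (List Int)) (c : Nat) : Nat :=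
  Set.ncard {p | OilP land p ∧ TouchO land p c}

noncomputable def specRes (land : List (List Int)) : List Int :=
  (List.range (land.headD []).length).map (fun c => (specCol land c : Int))

theorem NbrP_symm {p b : Nat × Nat} (h : NbrP p b) : NbrP b p := by
  unfold NbrP at *; omega

theorem AdjO_symm {land : List (List Int)} {p b : Nat × Nat} (h : AdjO land p b) : AdjO land b p :=
  ⟨h.2.1, h.1, NbrP_symm h.2.2⟩

theorem ConnO_symm {land : List (List Int)} {p b : Nat × Nat} (h : ConnO land p b) : ConnO land b p := by
  induction h with
  | refl => exact Relation.ReflTransGen.refl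
  | tail _ hadj ih => exact Relation.ReflTransGen.head (AdjO_symm hadj) ih

theorem ConnO_trans {land : List (List Int)} {a b c : Nat × Nat}
    (h1 : ConnO land a b) (h2 : ConnO land b c) : ConnO land a c :=
  Relation.ReflTransGen.trans h1 h2

theorem oil_finite (land : List (List Int)) (S : Set (Nat × Nat))
    (hS : ∀ p ∈ S, OilP land p) : S.Finite := by
  apply Set.Finite.subset ((Set.finite_Iio land.length).prod (Set.finite_Iio (land.headD []).length))
  intro p hp
  exact ⟨(hS p hp).1, (hS p hp).2.1⟩

theorem ncard_eq_length {α : Type} [DecidableEq α] (L : List α) (S : Set α)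
    (hnd : L.Nodup) (h : ∀ p, p ∈ L ↔ p ∈ S) : S.ncard = L.length := by
  have : S = ↑L.toFinset := by
    ext p; simp [← h]
  rw [this, Set.ncard_coe_finset, List.card_toFinset, hnd.dedup]

-- ---------- generic list helpers ----------

theorem foldl_flatMap {α β γ : Type} (l : List α) (g : α → List β) (f : γ → β → γ) (i : γ) :
    (l.flatMap g).foldl f i = l.foldl (fun a b => (g b).foldl f a) i := by
  induction l generalizing i with
  | nil => rfl
  | cons a t ih => simp [List.flatMap_cons, List.foldl_append, ih]

theorem getD_modify_self (res : List Int) (k : Nat) (f : Int → Int) (hk : k < res.length) :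
    (res.modify k f).getD k 0 = f (res.getD k 0) := by
  induction res generalizing k with
  | nil => simp at hk
  | cons a t ih =>
    cases k with
    | zero => simp [List.modify]
    | succ j => simpa [List.modify] using ih j (by simpa using hk)

theorem getD_modify_ne (res : List Int) (k c : Nat) (f : Int → Int) (hck : c ≠ k) :
    (res.modify k f).getD c 0 = res.getD c 0 := by
  induction res generalizing k c with
  | nil => simp [List.modify]
  | cons a t ih =>
    cases k with
    | zero => cases c with
      | zero => omega
      | succ j => simp [List.modify]
    | succ j =>
      cases c with
      | zero => simp [List.modify]
      | succ i => simpa [List.modify] using ih j i (by omega)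

-- ---------- A side: BFS characterisation ----------

def VisS (vis : List (List Bool)) : Set (Nat × Nat) := {p | visAt vis p.1 p.2 = true}

theorem visAt_visMark (vis : List (List Bool)) (y x a b : Nat) :
    visAt (visMark vis y x) a b =
      if y = a then (vis.getD a []).set x true |>.getD b true else visAt vis a b := by
  unfold visAt visMark
  simp only [List.getD]
  rw [List.getElem?_modify]
  by_cases hya : y = a
  · subst hya
    simp only [if_pos rfl]
    cases hy : vis[y]? with
    | none => simp [hy]
    | some row => simp [hy]
  · simp only [if_neg hya]
    cases hy : vis[a]? with
    | none => simp [hy]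
    | some row => simp [hy, hya]

theorem getD_set_row (row : List Bool) (x b : Nat) (hx : x < row.length) :
    ((row.set x true).getD b true = true ↔ b = x ∨ row.getD b true = true) := by
  rw [List.getD, List.getElem?_set]
  by_cases hbx : x = b
  · subst hbx
    simp [hx]
  · simp only [if_neg hbx]
    rw [List.getD]
    constructor
    · exact fun h => Or.inr h
    · rintro (h | h)
      · exact absurd h.symm hbx
      · exact h

theorem visAt_false_row_bounds {vis : List (List Bool)} {y x : Nat} (h : visAt vis y x = false) :
    x < (vis.getD y []).length := by
  unfold visAt at h
  by_contra hx
  push Not at hx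
  rw [List.getD_eq_default] at h
  · simp at h
  · omega

theorem VisS_visMark {vis : List (List Bool)} {y x : Nat} (h : visAt vis y x = false) :
    VisS (visMark vis y x) = insert ((y, x) : Nat × Nat) (VisS vis) := by
  have hx := visAt_false_row_bounds h
  ext ⟨a, b⟩
  simp only [VisS, Set.mem_setOf_eq, Set.mem_insert_iff, Prod.mk.injEq]
  rw [visAt_visMark]
  by_cases hya : y = a
  · subst hya
    rw [if_pos rfl, getD_set_row _ _ _ hx]
    unfold visAt
    constructor
    · rintro (rfl | hb)
      · exact Or.inl ⟨rfl, rfl⟩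
      · exact Or.inr hb
    · rintro (⟨-, rfl⟩ | hb)
      · exact Or.inl rfl
      · exact Or.inr hb
  · rw [if_neg hya]
    constructor
    · exact fun hb => Or.inr hb
    · rintro (⟨rfl, -⟩ | hb)
      · exact absurd rfl hya
      · exact hb

theorem VisS_mono_visMark (vis : List (List Bool)) (y x : Nat) :
    VisS vis ⊆ VisS (visMark vis y x) := by
  rintro ⟨a, b⟩ hab
  simp only [VisS, Set.mem_setOf_eq] at hab ⊢
  rw [visAt_visMark]
  by_cases hya : y = a
  · subst hya
    rw [if_pos rfl]
    unfold visAt at hab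
    simp only [List.getD] at hab ⊢
    rw [List.getElem?_set]
    split_ifs with h1 h2
    · rfl
    · rfl
    · exact hab
  · rw [if_neg hya]
    exact hab

-- net effect of a prefix of the four direction steps from popped cell p
def Chain (land : List (List Int)) (p : Nat × Nat) (st st' : BfsSt) : Prop :=
  ∃ dL : List (Nat × Nat),
    st'.2.1 = st.2.1 ++ dL.map (fun b => ((b.1 : Int), (b.2 : Int))) ∧
    st'.2.2.1 = st.2.2.1 + dL.length ∧
    (∀ c : Int, c ∈ st'.2.2.2 ↔ c ∈ st.2.2.2 ∨ ∃ b ∈ dL, c = (b.2 : Int)) ∧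
    st'.2.2.2.Nodup ∧
    VisS st.1 ⊆ VisS st'.1 ∧
    dL.Nodup ∧
    (∀ b ∈ dL, OilP land b ∧ NbrP p b ∧ b ∈ VisS st'.1 ∧ b ∉ VisS st.1) ∧
    (∀ b : Nat × Nat, b ∈ VisS st'.1 → b ∉ VisS st.1 →
        NbrP p b ∧ b.1 < land.length ∧ b.2 < (land.headD []).length ∧ (OilP land b → b ∈ dL))

theorem Chain_refl (land : List (List Int)) (p : Nat × Nat) (st : BfsSt) (hnd : st.2.2.2.Nodup) :
    Chain land p st st := by
  refine ⟨[], by simp, by simp, by simp, hnd, le_refl _, List.nodup_nil, by simp, ?_⟩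
  intro b h1 h2; exact absurd h1 h2

theorem Chain_comp {land : List (List Int)} {p : Nat × Nat} {st0 st1 st2 : BfsSt}
    (h1 : Chain land p st0 st1) (h2 : Chain land p st1 st2) : Chain land p st0 st2 := by
  obtain ⟨L1, q1, o1, m1, n1, v1, nd1, pr1, nv1⟩ := h1
  obtain ⟨L2, q2, o2, m2, n2, v2, nd2, pr2, nv2⟩ := h2
  refine ⟨L1 ++ L2, ?_, ?_, ?_, n2, fun b hb => v2 (v1 hb), ?_, ?_, ?_⟩
  · rw [q2, q1, List.map_append, List.append_assoc]
  · rw [o2, o1, List.length_append]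
    push_cast
    ring
  · intro c
    rw [m2 c, m1 c]
    constructor
    · rintro ((h | ⟨b, hb, rfl⟩) | ⟨b, hb, rfl⟩)
      · exact Or.inl h
      · exact Or.inr ⟨b, by simp [hb], rfl⟩
      · exact Or.inr ⟨b, by simp [hb], rfl⟩
    · rintro (h | ⟨b, hb, rfl⟩)
      · exact Or.inl (Or.inl h)
      · rcases List.mem_append.1 hb with hb | hb
        · exact Or.inl (Or.inr ⟨b, hb, rfl⟩)
        · exact Or.inr ⟨b, hb, rfl⟩
  · rw [List.nodup_append]
    refine ⟨nd1, nd2, ?_⟩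
    intro a ha b hb heq
    subst heq
    exact (pr2 a hb).2.2.2 ((pr1 a ha).2.2.1)
  · intro b hb
    rcases List.mem_append.1 hb with hb | hb
    · obtain ⟨ho, hn, hv, hnv⟩ := pr1 b hb
      exact ⟨ho, hn, v2 hv, hnv⟩
    · obtain ⟨ho, hn, hv, hnv⟩ := pr2 b hb
      exact ⟨ho, hn, hv, fun hc => hnv (v1 hc)⟩
  · intro b hb2 hb0
    by_cases hb1 : b ∈ VisS st1.1
    · obtain ⟨hn, hbn, hbm, ho⟩ := nv1 b hb1 hb0
      exact ⟨hn, hbn, hbm, fun hoil => List.mem_append.2 (Or.inl (ho hoil))⟩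
    · obtain ⟨hn, hbn, hbm, ho⟩ := nv2 b hb2 hb1
      exact ⟨hn, hbn, hbm, fun hoil => List.mem_append.2 (Or.inr (ho hoil))⟩

def stepCore (land : List (List Int)) (p : Nat × Nat) (dyv dxv : Int) (st : BfsSt) : BfsSt :=
  if -1 < (p.1 : Int) + dyv ∧ (p.1 : Int) + dyv < (land.length : Int) ∧
      -1 < (p.2 : Int) + dxv ∧ (p.2 : Int) + dxv < ((land.headD []).length : Int) then
    if visAt st.1 ((p.1 : Int) + dyv).toNat ((p.2 : Int) + dxv).toNat = false then
      let vis' := visMark st.1 ((p.1 : Int) + dyv).toNat ((p.2 : Int) + dxv).toNat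
      if landAt land ((p.1 : Int) + dyv).toNat ((p.2 : Int) + dxv).toNat ≠ 0 then
        (vis', st.2.1 ++ [((p.1 : Int) + dyv, (p.2 : Int) + dxv)], st.2.2.1 + 1,
          st.2.2.2.add ((p.2 : Int) + dxv))
      else (vis', st.2.1, st.2.2.1, st.2.2.2)
    else st
  else st

theorem bfsStep_eq_core (land : List (List Int)) (p : Nat × Nat) (st : BfsSt) (i : Nat) (hi : i < 4) :
    bfsStep land (land.length : Int) ((land.headD []).length : Int) ((p.1 : Int), (p.2 : Int)) st i =
      stepCore land p (([0, 0, -1, 1] : List Int).getD i 0) (([-1, 1, 0, 0] : List Int).getD i 0) st := by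
  interval_cases i <;> rfl

-- offsets are one of the four unit moves
def DirOK (dyv dxv : Int) : Prop := (dyv = 0 ∧ (dxv = 1 ∨ dxv = -1)) ∨ (dxv = 0 ∧ (dyv = 1 ∨ dyv = -1))

theorem nbr_of_dir {p b : Nat × Nat} {dyv dxv : Int} (hdir : DirOK dyv dxv)
    (hb1 : (b.1 : Int) = (p.1 : Int) + dyv) (hb2 : (b.2 : Int) = (p.2 : Int) + dxv) : NbrP p b := by
  unfold DirOK at hdir
  unfold NbrP
  omega

theorem chain_stepCore (land : List (List Int)) (p : Nat × Nat) (st : BfsSt) (dyv dxv : Int)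
    (hdir : DirOK dyv dxv) (hnd : st.2.2.2.Nodup) :
    Chain land p st (stepCore land p dyv dxv st) := by
  unfold stepCore
  split_ifs with hg hv ho
  · -- marked, oil: one new cell
    set b : Nat × Nat := (((p.1 : Int) + dyv).toNat, ((p.2 : Int) + dxv).toNat) with hbdef
    have hb1 : (b.1 : Int) = (p.1 : Int) + dyv := by simp [hbdef]; omega
    have hb2 : (b.2 : Int) = (p.2 : Int) + dxv := by simp [hbdef]; omega
    have hbn : b.1 < land.length := by omega
    have hbm : b.2 < (land.headD []).length := by omega
    have hvis := VisS_visMark hv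
    refine ⟨[b], ?_, by simp, ?_, PySem.Set.nodup_add _ _ hnd, ?_, List.nodup_singleton b, ?_, ?_⟩
    · simp [hb1, hb2]
    · intro c
      rw [PySem.Set.mem_add]
      simp [hb2]
    · rw [hvis]
      exact Set.subset_insert _ _
    · intro b' hb'
      rw [List.mem_singleton] at hb'
      subst hb'
      refine ⟨⟨hbn, hbm, ho⟩, nbr_of_dir hdir hb1 hb2, ?_, ?_⟩
      · rw [hvis]; exact Set.mem_insert _ _
      · intro hc
        simp only [VisS, Set.mem_setOf_eq] at hc
        rw [hv] at hc
        exact Bool.false_ne_true hc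
    · intro b' hv' hnv'
      rw [hvis] at hv'
      rcases Set.mem_insert_iff.1 hv' with rfl | h
      · exact ⟨nbr_of_dir hdir hb1 hb2, hbn, hbm, fun _ => List.mem_singleton.2 rfl⟩
      · exact absurd h hnv'
  · -- marked, zero cell
    set b : Nat × Nat := (((p.1 : Int) + dyv).toNat, ((p.2 : Int) + dxv).toNat) with hbdef
    have hb1 : (b.1 : Int) = (p.1 : Int) + dyv := by simp [hbdef]; omega
    have hb2 : (b.2 : Int) = (p.2 : Int) + dxv := by simp [hbdef]; omega
    have hbn : b.1 < land.length := by omega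
    have hbm : b.2 < (land.headD []).length := by omega
    have hvis := VisS_visMark hv
    push Not at ho
    refine ⟨[], by simp, by simp, by simp, hnd, ?_, List.nodup_nil, by simp, ?_⟩
    · rw [hvis]
      exact Set.subset_insert _ _
    · intro b' hv' hnv'
      rw [hvis] at hv'
      rcases Set.mem_insert_iff.1 hv' with rfl | h
      · refine ⟨nbr_of_dir hdir hb1 hb2, hbn, hbm, fun hoil => absurd ho hoil.2.2⟩
      · exact absurd h hnv'
  · exact Chain_refl land p st hnd
  · exact Chain_refl land p st hnd

theorem Chain_bfsStep (land : List (List Int)) (p : Nat × Nat) (st0 st : BfsSt) (i : Nat) (hi : i < 4)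
    (hch : Chain land p st0 st) :
    Chain land p st0 (bfsStep land (land.length : Int) ((land.headD []).length : Int) ((p.1 : Int), (p.2 : Int)) st i) := by
  rw [bfsStep_eq_core land p st i hi]
  refine Chain_comp hch (chain_stepCore land p st _ _ ?_ hch.choose_spec.2.2.2.1)
  interval_cases i
  · exact Or.inl ⟨rfl, Or.inr rfl⟩
  · exact Or.inl ⟨rfl, Or.inl rfl⟩
  · exact Or.inr ⟨rfl, Or.inr rfl⟩
  · exact Or.inr ⟨rfl, Or.inl rfl⟩

theorem VisS_mono_stepCore (land : List (List Int)) (p : Nat × Nat) (st : BfsSt) (dyv dxv : Int) :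
    VisS st.1 ⊆ VisS (stepCore land p dyv dxv st).1 := by
  unfold stepCore
  split_ifs <;> first
    | exact VisS_mono_visMark _ _ _
    | exact fun _ h => h

theorem stepCore_visits (land : List (List Int)) (p b : Nat × Nat) (st : BfsSt) (dyv dxv : Int)
    (hb1 : (b.1 : Int) = (p.1 : Int) + dyv) (hb2 : (b.2 : Int) = (p.2 : Int) + dxv)
    (hbn : b.1 < land.length) (hbm : b.2 < (land.headD []).length) :
    b ∈ VisS (stepCore land p dyv dxv st).1 := by
  have hb : (((p.1 : Int) + dyv).toNat, ((p.2 : Int) + dxv).toNat) = b := by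
    obtain ⟨x1, x2⟩ := b
    simp only [Prod.mk.injEq]
    omega
  unfold stepCore
  rw [if_pos (by omega)]
  split_ifs with hv _
  · rw [VisS_visMark hv, hb]
    exact Set.mem_insert _ _
  · rw [VisS_visMark hv, hb]
    exact Set.mem_insert _ _
  · simp only [VisS, Set.mem_setOf_eq]
    rw [← hb] at *
    exact Bool.of_not_eq_false hv

theorem bfsBody_nbrs (land : List (List Int)) (p : Nat × Nat) (st : BfsSt)
    (hp1 : p.1 < land.length) (hp2 : p.2 < (land.headD []).length) (hnd : st.2.2.2.Nodup) :
    Chain land p st ((List.range 4).foldl (bfsStep land (land.length : Int) ((land.headD []).length : Int) ((p.1 : Int), (p.2 : Int))) st) ∧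
    (∀ b : Nat × Nat, NbrP p b → b.1 < land.length → b.2 < (land.headD []).length →
      b ∈ VisS ((List.range 4).foldl (bfsStep land (land.length : Int) ((land.headD []).length : Int) ((p.1 : Int), (p.2 : Int))) st).1) := by
  have hr4 : List.range 4 = [0, 1, 2, 3] := rfl
  rw [hr4]
  simp only [List.foldl_cons, List.foldl_nil]
  set f := bfsStep land (land.length : Int) ((land.headD []).length : Int) ((p.1 : Int), (p.2 : Int)) with hf
  have c0 : Chain land p st st := Chain_refl land p st hnd
  have c1 : Chain land p st (f st 0) := Chain_bfsStep land p st st 0 (by omega) c0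
  have c2 : Chain land p st (f (f st 0) 1) := Chain_bfsStep land p st _ 1 (by omega) c1
  have c3 : Chain land p st (f (f (f st 0) 1) 2) := Chain_bfsStep land p st _ 2 (by omega) c2
  have c4 : Chain land p st (f (f (f (f st 0) 1) 2) 3) := Chain_bfsStep land p st _ 3 (by omega) c3
  refine ⟨c4, ?_⟩
  intro b hnbr hbn hbm
  have m1 : ∀ st', VisS st'.1 ⊆ VisS (f st' 1).1 := by
    intro st'
    rw [hf, bfsStep_eq_core land p st' 1 (by omega)]
    exact VisS_mono_stepCore _ _ _ _ _
  have m2 : ∀ st', VisS st'.1 ⊆ VisS (f st' 2).1 := by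
    intro st'
    rw [hf, bfsStep_eq_core land p st' 2 (by omega)]
    exact VisS_mono_stepCore _ _ _ _ _
  have m3 : ∀ st', VisS st'.1 ⊆ VisS (f st' 3).1 := by
    intro st'
    rw [hf, bfsStep_eq_core land p st' 3 (by omega)]
    exact VisS_mono_stepCore _ _ _ _ _
  rcases hnbr with ⟨h1, h2 | h2⟩ | ⟨h1, h2 | h2⟩
  · -- right neighbour: direction index 1 (dx = 1)
    apply m3; apply m2
    rw [hf, bfsStep_eq_core land p _ 1 (by omega)]
    exact stepCore_visits land p b _ _ _ (by simp; omega) (by simp; omega) hbn hbm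
  · -- left neighbour: direction index 0 (dx = -1)
    apply m3; apply m2; apply m1
    rw [hf, bfsStep_eq_core land p _ 0 (by omega)]
    exact stepCore_visits land p b _ _ _ (by simp; omega) (by simp; omega) hbn hbm
  · -- down neighbour: direction index 3 (dy = 1)
    rw [hf, bfsStep_eq_core land p _ 3 (by omega)]
    exact stepCore_visits land p b _ _ _ (by simp; omega) (by simp; omega) hbn hbm
  · -- up neighbour: direction index 2 (dy = -1)
    apply m3
    rw [hf, bfsStep_eq_core land p _ 2 (by omega)]
    exact stepCore_visits land p b _ _ _ (by simp; omega) (by simp; omega) hbn hbm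

-- the BFS loop: everything the outer loop needs, in one statement
theorem bfs_loop_main (land : List (List Int)) (R : Set (Nat × Nat))
    (hR : ∀ a b, a ∈ R → AdjO land a b → b ∈ R) :
    ∀ q vis oil mr, mr.Nodup →
    (∀ z ∈ q, ∃ p : Nat × Nat, z = ((p.1 : Int), (p.2 : Int)) ∧ OilP land p ∧ p ∈ VisS vis ∧ p ∈ R) →
    ∃ L : List (Nat × Nat),
      L.Nodup ∧
      (∀ p : Nat × Nat, p ∈ L ↔ OilP land p ∧ p ∈ VisS (bfsLoop land (land.length : Int) ((land.headD []).length : Int) q vis oil mr).2.2 ∧ p ∉ VisS vis) ∧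
      (bfsLoop land (land.length : Int) ((land.headD []).length : Int) q vis oil mr).1 = oil + L.length ∧
      (∀ c : Int, c ∈ (bfsLoop land (land.length : Int) ((land.headD []).length : Int) q vis oil mr).2.1 ↔ c ∈ mr ∨ ∃ b ∈ L, c = (b.2 : Int)) ∧
      (bfsLoop land (land.length : Int) ((land.headD []).length : Int) q vis oil mr).2.1.Nodup ∧
      VisS vis ⊆ VisS (bfsLoop land (land.length : Int) ((land.headD []).length : Int) q vis oil mr).2.2 ∧
      (∀ p ∈ L, p ∈ R) ∧
      (∀ p : Nat × Nat, (((p.1 : Int), (p.2 : Int)) ∈ q ∧ p.1 < land.length ∧ p.2 < (land.headD []).length) ∨ p ∈ L →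
        ∀ b, NbrP p b → b.1 < land.length → b.2 < (land.headD []).length →
          b ∈ VisS (bfsLoop land (land.length : Int) ((land.headD []).length : Int) q vis oil mr).2.2) := by
  intro q vis oil mr
  induction q, vis, oil, mr using bfsLoop.induct (land := land) (n := (land.length : Int))
      (m := ((land.headD []).length : Int)) with
  | case1 vis oil mr =>
    intro hmr hq
    rw [bfsLoop]
    refine ⟨[], List.nodup_nil, ?_, by simp, by simp, hmr, fun _ h => h, by simp, ?_⟩
    · intro p
      simp only [List.not_mem_nil, false_iff]
      rintro ⟨_, hv, hnv⟩
      exact hnv hv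
    · rintro p (⟨hpq, _⟩ | hpl)
      · exact (List.not_mem_nil hpq).elim
      · exact (List.not_mem_nil hpl).elim
  | case2 vis oil mr yx qt stv ih =>
    intro hmr hq
    obtain ⟨p, rfl, hpo, hpv, hpR⟩ := hq _ (List.mem_cons_self ..)
    obtain ⟨hchain, hnbrs⟩ := bfsBody_nbrs land p (vis, qt, oil, mr) hpo.1 hpo.2.1 hmr
    set stF := (List.range 4).foldl
      (bfsStep land (land.length : Int) ((land.headD []).length : Int) ((p.1 : Int), (p.2 : Int)))
      (vis, qt, oil, mr) with hstF
    obtain ⟨dL, hq1, ho1, hm1, hn1, hv1, hnd1, hpr1, hnv1⟩ := hchain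
    have hqF : ∀ z ∈ stF.2.1, ∃ p' : Nat × Nat,
        z = ((p'.1 : Int), (p'.2 : Int)) ∧ OilP land p' ∧ p' ∈ VisS stF.1 ∧ p' ∈ R := by
      intro z hz
      rw [hq1] at hz
      rcases List.mem_append.1 hz with hz | hz
      · obtain ⟨p', hz', ho', hv', hR'⟩ := hq z (List.mem_cons_of_mem _ hz)
        exact ⟨p', hz', ho', hv1 hv', hR'⟩
      · rw [List.mem_map] at hz
        obtain ⟨b, hb, rfl⟩ := hz
        obtain ⟨hbo, hbn, hbv, _⟩ := hpr1 b hb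
        exact ⟨b, rfl, hbo, hbv, hR p b hpR ⟨hpo, hbo, hbn⟩⟩
    obtain ⟨L1, hL1nd, hL1mem, hL1oil, hL1mr, hL1mrnd, hL1vis, hL1R, hL1cl⟩ := ih hn1 hqF
    rw [bfsLoop]
    simp only [← hstF]
    refine ⟨dL ++ L1, ?_, ?_, ?_, ?_, hL1mrnd, ?_, ?_, ?_⟩
    · rw [List.nodup_append]
      refine ⟨hnd1, hL1nd, ?_⟩
      intro a ha b hb heq
      subst heq
      exact ((hL1mem a).1 hb).2.2 ((hpr1 a ha).2.2.1)
    · intro p'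
      rw [List.mem_append, hL1mem p']
      constructor
      · rintro (hd | ⟨ho', hv', hnv'⟩)
        · obtain ⟨ho', hn', hv', hnv'⟩ := hpr1 p' hd
          exact ⟨ho', hL1vis hv', hnv'⟩
        · exact ⟨ho', hv', fun hc => hnv' (hv1 hc)⟩
      · rintro ⟨ho', hv', hnv'⟩
        by_cases hmid : p' ∈ VisS stF.1
        · exact Or.inl ((hnv1 p' hmid hnv').2.2.2 ho')
        · exact Or.inr ⟨ho', hv', hmid⟩
    · rw [hL1oil, ho1, List.length_append]
      push_cast
      ring
    · intro c
      rw [hL1mr c, hm1 c]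
      constructor
      · rintro ((h | ⟨b, hb, rfl⟩) | ⟨b, hb, rfl⟩)
        · exact Or.inl h
        · exact Or.inr ⟨b, List.mem_append.2 (Or.inl hb), rfl⟩
        · exact Or.inr ⟨b, List.mem_append.2 (Or.inr hb), rfl⟩
      · rintro (h | ⟨b, hb, rfl⟩)
        · exact Or.inl (Or.inl h)
        · rcases List.mem_append.1 hb with hb | hb
          · exact Or.inl (Or.inr ⟨b, hb, rfl⟩)
          · exact Or.inr ⟨b, hb, rfl⟩
    · exact fun b hb => hL1vis (hv1 hb)
    · intro p' hp'
      rcases List.mem_append.1 hp' with hp' | hp'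
      · obtain ⟨ho', hn', _, _⟩ := hpr1 p' hp'
        exact hR p p' hpR ⟨hpo, ho', hn'⟩
      · exact hL1R p' hp'
    · rintro p' (⟨hpq, hb1, hb2⟩ | hpl)
      · rcases List.mem_cons.1 hpq with heq | hpq
        · have hpp : p' = p := by
            have h1 : (p'.1 : Int) = (p.1 : Int) := congrArg Prod.fst heq
            have h2 : (p'.2 : Int) = (p.2 : Int) := congrArg Prod.snd heq
            obtain ⟨a1, a2⟩ := p'
            obtain ⟨b1', b2'⟩ := p
            simp only [Prod.mk.injEq]
            omega
          subst hpp
          intro b hnbr hbn hbm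
          exact hL1vis (hnbrs b hnbr hbn hbm)
        · intro b hnbr hbn hbm
          refine hL1cl p' (Or.inl ⟨?_, hb1, hb2⟩) b hnbr hbn hbm
          rw [hq1]
          exact List.mem_append.2 (Or.inl hpq)
      · rcases List.mem_append.1 hpl with hd | hl1
        · intro b hnbr hbn hbm
          refine hL1cl p' (Or.inl ⟨?_, (hpr1 p' hd).1.1, (hpr1 p' hd).1.2.1⟩) b hnbr hbn hbm
          rw [hq1]
          exact List.mem_append.2 (Or.inr (List.mem_map.2 ⟨p', hd, rfl⟩))
        · exact hL1cl p' (Or.inr hl1)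

def CompNS (land : List (List Int)) (s : Nat × Nat) : Set (Nat × Nat) :=
  {p | OilP land p ∧ ConnO land s p ∧ p ≠ s}

-- BFS from a fresh oil cell s computes its component
theorem bfs_char (land : List (List Int)) (s : Nat × Nat) (vis : List (List Bool))
    (hs : OilP land s) (hsv : s ∈ VisS vis)
    (hfresh : ∀ p, OilP land p → ConnO land s p → p ≠ s → p ∉ VisS vis) :
    ∃ L : List (Nat × Nat),
      L.Nodup ∧
      (∀ p : Nat × Nat, p ∈ L ↔ p ∈ CompNS land s) ∧
      (bfsLoop land (land.length : Int) ((land.headD []).length : Int) [((s.1 : Int), (s.2 : Int))] vis 1 PySem.Set.empty).1 = 1 + L.length ∧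
      (∀ c : Int, c ∈ (bfsLoop land (land.length : Int) ((land.headD []).length : Int) [((s.1 : Int), (s.2 : Int))] vis 1 PySem.Set.empty).2.1 ↔ ∃ b ∈ L, c = (b.2 : Int)) ∧
      (bfsLoop land (land.length : Int) ((land.headD []).length : Int) [((s.1 : Int), (s.2 : Int))] vis 1 PySem.Set.empty).2.1.Nodup ∧
      VisS vis ⊆ VisS (bfsLoop land (land.length : Int) ((land.headD []).length : Int) [((s.1 : Int), (s.2 : Int))] vis 1 PySem.Set.empty).2.2 ∧
      (∀ p : Nat × Nat, OilP land p →
        (p ∈ VisS (bfsLoop land (land.length : Int) ((land.headD []).length : Int) [((s.1 : Int), (s.2 : Int))] vis 1 PySem.Set.empty).2.2 ↔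
          p ∈ VisS vis ∨ ConnO land s p)) := by
  have hR : ∀ a b, a ∈ {p | OilP land p ∧ ConnO land s p} → AdjO land a b →
      b ∈ {p | OilP land p ∧ ConnO land s p} := by
    rintro a b ⟨hao, hac⟩ hadj
    exact ⟨hadj.2.1, Relation.ReflTransGen.tail hac hadj⟩
  have hq : ∀ z ∈ [((s.1 : Int), (s.2 : Int))], ∃ p : Nat × Nat,
      z = ((p.1 : Int), (p.2 : Int)) ∧ OilP land p ∧ p ∈ VisS vis ∧
        p ∈ {p | OilP land p ∧ ConnO land s p} := by
    intro z hz
    rw [List.mem_singleton] at hz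
    subst hz
    exact ⟨s, rfl, hs, hsv, hs, Relation.ReflTransGen.refl⟩
  obtain ⟨L, hnd, hmem, hoil, hmr, hmrnd, hmono, hRs, hcl⟩ :=
    bfs_loop_main land {p | OilP land p ∧ ConnO land s p} hR
      [((s.1 : Int), (s.2 : Int))] vis 1 PySem.Set.empty List.nodup_nil hq
  have hcomp : ∀ p : Nat × Nat, ConnO land s p → OilP land p →
      p ∈ VisS (bfsLoop land (land.length : Int) ((land.headD []).length : Int) [((s.1 : Int), (s.2 : Int))] vis 1 PySem.Set.empty).2.2 := by
    intro p hconn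
    induction hconn with
    | refl => exact fun _ => hmono hsv
    | @tail a b hca hadj ih =>
      intro _
      have hav := ih hadj.1
      have hcase : (((a.1 : Int), (a.2 : Int)) ∈ [((s.1 : Int), (s.2 : Int))] ∧
          a.1 < land.length ∧ a.2 < (land.headD []).length) ∨ a ∈ L := by
        by_cases has : a = s
        · subst has
          exact Or.inl ⟨List.mem_singleton.2 rfl, hadj.1.1, hadj.1.2.1⟩
        · refine Or.inr ((hmem a).2 ⟨hadj.1, hav, hfresh a hadj.1 hca has⟩)
      exact hcl a hcase b hadj.2.2 hadj.2.1.1 hadj.2.1.2.1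
  have hmemC : ∀ p : Nat × Nat, p ∈ L ↔ p ∈ CompNS land s := by
    intro p
    rw [hmem p]
    constructor
    · rintro ⟨ho, hv, hnv⟩
      refine ⟨ho, (hRs p ((hmem p).2 ⟨ho, hv, hnv⟩)).2, ?_⟩
      rintro rfl
      exact hnv hsv
    · rintro ⟨ho, hconn, hne⟩
      exact ⟨ho, hcomp p hconn ho, hfresh p ho hconn hne⟩
  refine ⟨L, hnd, hmemC, by simpa using hoil, ?_, hmrnd, hmono, ?_⟩
  · intro c
    rw [hmr c]
    constructor
    · rintro (hc | h)
      · exact absurd hc (List.not_mem_nil)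
      · exact h
    · exact fun h => Or.inr h
  · intro p hpo
    constructor
    · intro hv
      by_cases hvv : p ∈ VisS vis
      · exact Or.inl hvv
      · exact Or.inr ((hRs p ((hmem p).2 ⟨hpo, hv, hvv⟩)).2)
    · rintro (hv | hconn)
      · exact hmono hv
      · exact hcomp p hconn hpo

-- ---------- A side: outer loop ----------
-- ---------- A side: outer loop ----------

def stepOuter (land : List (List Int)) (st : List Int × List (List Bool)) (s : Nat × Nat) :
    List Int × List (List Bool) :=
  outerStep land st s.1 s.2

def OuterInv (land : List (List Int)) (pre : List (Nat × Nat)) (st : List Int × List (List Bool)) : Prop :=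
  (∀ p : Nat × Nat, OilP land p → (p ∈ VisS st.2 ↔ ∃ s ∈ pre, OilP land s ∧ ConnO land s p)) ∧
  st.1.length = (land.headD []).length ∧
  (∀ c, c < (land.headD []).length →
    st.1.getD c 0 = (Set.ncard {p | OilP land p ∧ p ∈ VisS st.2 ∧ TouchO land p c} : Int)) ∧
  (∀ y x : Nat, visAt st.2 y x = false → y < land.length ∧ x < (land.headD []).length)

theorem resfold_mr (cs : List Int) (res : List Int) (o : Int) (x : Nat)
    (hnd : cs.Nodup) (hcs : ∀ c ∈ cs, ∃ b : Nat, c = (b : Int) ∧ b < res.length) :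
    ((cs.foldl (fun res c => if c ≠ (x : Int) then res.modify c.toNat (fun v => v + o) else res) res)).length = res.length ∧
    ∀ k : Nat, (cs.foldl (fun res c => if c ≠ (x : Int) then res.modify c.toNat (fun v => v + o) else res) res).getD k 0 =
      res.getD k 0 + (if (k : Int) ∈ cs ∧ k ≠ x then o else 0) := by
  induction cs generalizing res with
  | nil => simp
  | cons a t ih =>
    rw [List.nodup_cons] at hnd
    obtain ⟨b, hab, hb⟩ := hcs a (List.mem_cons_self ..)
    subst hab
    simp only [List.foldl_cons]
    have hmemiff : ∀ k : Nat, k ≠ b →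
        (((k : Int) ∈ (b : Int) :: t ∧ k ≠ x) ↔ ((k : Int) ∈ t ∧ k ≠ x)) := by
      intro k hkb
      constructor
      · rintro ⟨h1, h2⟩
        rcases List.mem_cons.1 h1 with h | h
        · omega
        · exact ⟨h, h2⟩
      · rintro ⟨h1, h2⟩
        exact ⟨List.mem_cons_of_mem _ h1, h2⟩
    by_cases hax : (b : Int) ≠ (x : Int)
    · rw [if_pos hax]
      have hlen : (res.modify ((b : Int)).toNat (fun v => v + o)).length = res.length := by simp
      obtain ⟨ihl, ihg⟩ := ih (res.modify ((b : Int)).toNat (fun v => v + o)) hnd.2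
        (fun c hc => by
          obtain ⟨b', h1, h2⟩ := hcs c (List.mem_cons_of_mem _ hc)
          exact ⟨b', h1, hlen ▸ h2⟩)
      refine ⟨by rw [ihl, hlen], ?_⟩
      intro k
      rw [ihg k]
      simp only [Int.toNat_natCast]
      by_cases hkb : k = b
      · subst hkb
        rw [getD_modify_self res k _ hb]
        rw [if_neg (fun hc => hnd.1 hc.1)]
        rw [if_pos ⟨List.mem_cons_self .., (by omega : k ≠ x)⟩]
        ring
      · rw [getD_modify_ne res b k _ hkb]
        rw [if_congr (hmemiff k hkb) rfl rfl]
    · rw [if_neg hax]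
      push Not at hax
      obtain ⟨ihl, ihg⟩ := ih res hnd.2 (fun c hc => hcs c (List.mem_cons_of_mem _ hc))
      refine ⟨ihl, ?_⟩
      intro k
      rw [ihg k]
      by_cases hkb : k = b
      · subst hkb
        rw [if_neg (by omega : ¬((k : Int) ∈ (k : Int) :: t ∧ k ≠ x))]
        rw [if_neg (fun hc => hnd.1 hc.1)]
      · rw [if_congr (hmemiff k hkb) rfl rfl]

theorem touch_congr (land : List (List Int)) {s p : Nat × Nat} (hconn : ConnO land s p) (c : Nat) :
    TouchO land p c ↔ TouchO land s c := by
  constructor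
  · rintro ⟨q, hq, hc, hcc⟩
    exact ⟨q, hq, ConnO_trans hconn hc, hcc⟩
  · rintro ⟨q, hq, hc, hcc⟩
    exact ⟨q, hq, ConnO_trans (ConnO_symm hconn) hc, hcc⟩

theorem stepOuter_inv (land : List (List Int)) (pre : List (Nat × Nat)) (st : List Int × List (List Bool))
    (s : Nat × Nat) (hinv : OuterInv land pre st) :
    OuterInv land (pre ++ [s]) (stepOuter land st s) := by
  classical
  obtain ⟨hvis, hlen, hres, hdims⟩ := hinv
  unfold stepOuter outerStep
  by_cases hv : visAt st.2 s.1 s.2 = false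
  · rw [if_pos hv]
    obtain ⟨hsn, hsm⟩ := hdims s.1 s.2 hv
    have hsnv : s ∉ VisS st.2 := by
      simp only [VisS, Set.mem_setOf_eq, hv]
      exact Bool.false_ne_true
    have hins : VisS (visMark st.2 s.1 s.2) = insert s (VisS st.2) := VisS_visMark hv
    have hmrk : VisS st.2 ⊆ VisS (visMark st.2 s.1 s.2) := VisS_mono_visMark st.2 s.1 s.2
    by_cases ho : landAt land s.1 s.2 ≠ 0
    · rw [if_pos ho]
      have hso : OilP land s := ⟨hsn, hsm, ho⟩
      have hfresh : ∀ p, OilP land p → ConnO land s p → p ≠ s → p ∉ VisS (visMark st.2 s.1 s.2) := by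
        intro p hpo hconn hne hmem
        rw [hins] at hmem
        rcases Set.mem_insert_iff.1 hmem with heq | hmem2
        · exact hne heq
        · obtain ⟨s', hs', hs'o, hs'c⟩ := (hvis p hpo).1 hmem2
          exact hsnv ((hvis s hso).2 ⟨s', hs', hs'o, ConnO_trans hs'c (ConnO_symm hconn)⟩)
      have hsv1 : s ∈ VisS (visMark st.2 s.1 s.2) := by
        rw [hins]
        exact Set.mem_insert _ _
      obtain ⟨L, hnd, hmem, hoil, hmr, hmrnd, hmono, hvisiff⟩ :=
        bfs_char land s (visMark st.2 s.1 s.2) hso hsv1 hfresh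
      set fin := bfsLoop land (land.length : Int) ((land.headD []).length : Int)
        [((s.1 : Int), (s.2 : Int))] (visMark st.2 s.1 s.2) 1 PySem.Set.empty with hfin
      have hcompfin : ∀ p : Nat × Nat, OilP land p →
          (p ∈ VisS fin.2.2 ↔ p ∈ VisS st.2 ∨ ConnO land s p) := by
        intro p hpo
        rw [hvisiff p hpo, hins]
        constructor
        · rintro (hm | hc)
          · rcases Set.mem_insert_iff.1 hm with heq | hm2
            · exact Or.inr (heq ▸ Relation.ReflTransGen.refl)
            · exact Or.inl hm2
          · exact Or.inr hc
        · rintro (hm | hc)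
          · exact Or.inl (Set.mem_insert_iff.2 (Or.inr hm))
          · exact Or.inr hc
      have hdisjc : ∀ p : Nat × Nat, OilP land p → ConnO land s p → p ∉ VisS st.2 := by
        intro p hpo hconn hmem
        obtain ⟨s', hs', hs'o, hs'c⟩ := (hvis p hpo).1 hmem
        exact hsnv ((hvis s hso).2 ⟨s', hs', hs'o, ConnO_trans hs'c (ConnO_symm hconn)⟩)
      have hLm : ∀ b ∈ L, (b.2 : Int) = ((b.2 : Nat) : Int) ∧ b.2 < st.1.length := by
        intro b hb
        have := ((hmem b).1 hb).1.2.1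
        exact ⟨rfl, by omega⟩
      have hcomp_card : (Set.ncard {p | OilP land p ∧ ConnO land s p} : Int) = fin.1 := by
        have h1 : {p | OilP land p ∧ ConnO land s p} = insert s (CompNS land s) := by
          ext p
          simp only [Set.mem_setOf_eq, Set.mem_insert_iff, CompNS]
          constructor
          · rintro ⟨h1, h2⟩
            by_cases hps : p = s
            · exact Or.inl hps
            · exact Or.inr ⟨h1, h2, hps⟩
          · rintro (rfl | ⟨h1, h2, _⟩)
            · exact ⟨hso, Relation.ReflTransGen.refl⟩
            · exact ⟨h1, h2⟩
        have h2 : s ∉ CompNS land s := by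
          rintro ⟨_, _, hne⟩
          exact hne rfl
        have h3 : (CompNS land s).Finite := oil_finite land _ (fun p hp => hp.1)
        rw [h1, Set.ncard_insert_of_notMem h2 h3, hoil,
          ncard_eq_length L (CompNS land s) hnd hmem]
        push_cast
        ring
      refine ⟨?_, ?_, ?_, ?_⟩
      · intro p hpo
        rw [hcompfin p hpo]
        constructor
        · rintro (hm | hc)
          · obtain ⟨s', h1, h2, h3⟩ := (hvis p hpo).1 hm
            exact ⟨s', by simp [h1], h2, h3⟩
          · exact ⟨s, by simp, hso, hc⟩
        · rintro ⟨s', hs', h2, h3⟩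
          rcases List.mem_append.1 hs' with hs' | hs'
          · exact Or.inl ((hvis p hpo).2 ⟨s', hs', h2, h3⟩)
          · rw [List.mem_singleton] at hs'
            subst hs'
            exact Or.inr h3
      · obtain ⟨hl2, _⟩ := resfold_mr fin.2.1 (st.1.modify s.2 (fun v => v + fin.1)) fin.1 s.2 hmrnd
          (fun c hc => by
            obtain ⟨b, hb, rfl⟩ := (hmr c).1 hc
            exact ⟨b.2, rfl, by simpa using (hLm b hb).2⟩)
        rw [hl2]
        simpa using hlen
      · intro c hc
        obtain ⟨hl2, hg2⟩ := resfold_mr fin.2.1 (st.1.modify s.2 (fun v => v + fin.1)) fin.1 s.2 hmrnd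
          (fun c hc => by
            obtain ⟨b, hb, rfl⟩ := (hmr c).1 hc
            exact ⟨b.2, rfl, by simpa using (hLm b hb).2⟩)
        rw [hg2 c]
        have hseteq : {p | OilP land p ∧ p ∈ VisS fin.2.2 ∧ TouchO land p c} =
            {p | OilP land p ∧ p ∈ VisS st.2 ∧ TouchO land p c} ∪
              (if TouchO land s c then {p | OilP land p ∧ ConnO land s p} else ∅) := by
          ext p
          by_cases hT : TouchO land s c
          · rw [if_pos hT]
            simp only [Set.mem_union, Set.mem_setOf_eq]
            constructor
            · rintro ⟨hpo, hpv, hpt⟩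
              rcases (hcompfin p hpo).1 hpv with hm | hcn
              · exact Or.inl ⟨hpo, hm, hpt⟩
              · exact Or.inr ⟨hpo, hcn⟩
            · rintro (⟨hpo, hpv, hpt⟩ | ⟨hpo, hcn⟩)
              · exact ⟨hpo, (hcompfin p hpo).2 (Or.inl hpv), hpt⟩
              · exact ⟨hpo, (hcompfin p hpo).2 (Or.inr hcn), (touch_congr land hcn c).2 hT⟩
          · rw [if_neg hT]
            simp only [Set.mem_union, Set.mem_setOf_eq, Set.mem_empty_iff_false, or_false]
            constructor
            · rintro ⟨hpo, hpv, hpt⟩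
              rcases (hcompfin p hpo).1 hpv with hm | hcn
              · exact ⟨hpo, hm, hpt⟩
              · exact absurd ((touch_congr land hcn c).1 hpt) hT
            · rintro ⟨hpo, hpv, hpt⟩
              exact ⟨hpo, (hcompfin p hpo).2 (Or.inl hpv), hpt⟩
        rw [hseteq]
        have hdisj : Disjoint {p | OilP land p ∧ p ∈ VisS st.2 ∧ TouchO land p c}
            (if TouchO land s c then {p | OilP land p ∧ ConnO land s p} else ∅) := by
          split_ifs
          · rw [Set.disjoint_left]
            rintro p ⟨hpo, hpv, _⟩ ⟨_, hcn⟩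
            exact hdisjc p hpo hcn hpv
          · exact Set.disjoint_empty _
        have hfin1 : {p | OilP land p ∧ p ∈ VisS st.2 ∧ TouchO land p c}.Finite :=
          oil_finite land _ (fun p hp => hp.1)
        have hfin2 : (if TouchO land s c then {p | OilP land p ∧ ConnO land s p} else ∅).Finite := by
          split_ifs
          · exact oil_finite land _ (fun p hp => hp.1)
          · exact Set.finite_empty
        rw [Set.ncard_union_eq hdisj hfin1 hfin2]
        have hiff : ∀ _ : c ≠ s.2, ((c : Int) ∈ fin.2.1 ↔ TouchO land s c) := by
          intro hcx
          constructor
          · intro hcm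
            obtain ⟨b, hb, hbe⟩ := (hmr (c : Int)).1 hcm
            obtain ⟨hbo, hbc, _⟩ := (hmem b).1 hb
            have : b.2 = c := by omega
            exact ⟨b, hbo, hbc, this⟩
          · rintro ⟨q, hqo, hqc, hqe⟩
            have hqs : q ≠ s := by
              rintro rfl
              exact hcx hqe.symm
            rw [hmr (c : Int)]
            exact ⟨q, (hmem q).2 ⟨hqo, hqc, hqs⟩, by omega⟩
        by_cases hT : TouchO land s c
        · rw [if_pos hT]
          push_cast
          rw [← hres c hc, hcomp_card]
          by_cases hcx : c = s.2
          · subst hcx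
            rw [getD_modify_self st.1 s.2 _ (by omega)]
            rw [if_neg (by simp : ¬((s.2 : Int) ∈ fin.2.1 ∧ s.2 ≠ s.2))]
            try ring
          · rw [getD_modify_ne st.1 s.2 c _ hcx]
            rw [if_pos ⟨(hiff hcx).2 hT, hcx⟩]
            try ring
        · rw [if_neg hT]
          rw [Set.ncard_empty]
          push_cast
          rw [← hres c hc]
          have hcx : c ≠ s.2 := by
            rintro rfl
            exact hT ⟨s, hso, Relation.ReflTransGen.refl, rfl⟩
          rw [getD_modify_ne st.1 s.2 c _ hcx]
          rw [if_neg (fun hc2 => hT ((hiff hcx).1 hc2.1))]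
          try ring
      · intro y x hvf
        have : (y, x) ∉ VisS st.2 := by
          intro hc
          have h2 : ((y, x) : Nat × Nat) ∈ VisS fin.2.2 := hmono (hmrk hc)
          simp only [VisS, Set.mem_setOf_eq] at h2
          rw [hvf] at h2
          exact Bool.false_ne_true h2
        apply hdims
        simp only [VisS, Set.mem_setOf_eq] at this
        exact Bool.of_not_eq_true this
    · rw [if_neg ho]
      push Not at ho
      have hsnoil : ¬ OilP land s := fun hc => hc.2.2 ho
      refine ⟨?_, hlen, ?_, ?_⟩
      · intro p hpo
        have hps : p ≠ s := fun hc => hsnoil (hc ▸ hpo)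
        have : p ∈ VisS (visMark st.2 s.1 s.2) ↔ p ∈ VisS st.2 := by
          rw [hins]
          simp [hps]
        rw [this, hvis p hpo]
        constructor
        · rintro ⟨s', h1, h2, h3⟩
          exact ⟨s', by simp [h1], h2, h3⟩
        · rintro ⟨s', hs', h2, h3⟩
          rcases List.mem_append.1 hs' with hs' | hs'
          · exact ⟨s', hs', h2, h3⟩
          · rw [List.mem_singleton] at hs'
            subst hs'
            exact absurd h2 hsnoil
      · intro c hc
        rw [hres c hc]
        congr 2
        ext p
        simp only [Set.mem_setOf_eq]
        constructor
        · rintro ⟨hpo, hpv, hpt⟩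
          exact ⟨hpo, hmrk hpv, hpt⟩
        · rintro ⟨hpo, hpv, hpt⟩
          have hps : p ≠ s := fun hc2 => hsnoil (hc2 ▸ hpo)
          rw [hins] at hpv
          rcases Set.mem_insert_iff.1 hpv with heq | hm
          · exact absurd heq hps
          · exact ⟨hpo, hm, hpt⟩
      · intro y x hvf
        have : (y, x) ∉ VisS st.2 := by
          intro hc
          have h2 := hmrk hc
          simp only [VisS, Set.mem_setOf_eq] at h2
          rw [hvf] at h2
          exact Bool.false_ne_true h2
        apply hdims
        simp only [VisS, Set.mem_setOf_eq] at this
        exact Bool.of_not_eq_true this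
  · rw [if_neg hv]
    have hsvv : s ∈ VisS st.2 := by
      simp only [VisS, Set.mem_setOf_eq]
      exact Bool.of_not_eq_false hv
    refine ⟨?_, hlen, fun c hc => hres c hc, hdims⟩
    intro p hpo
    rw [hvis p hpo]
    constructor
    · rintro ⟨s', h1, h2, h3⟩
      exact ⟨s', by simp [h1], h2, h3⟩
    · rintro ⟨s', hs', h2, h3⟩
      rcases List.mem_append.1 hs' with hs' | hs'
      · exact ⟨s', hs', h2, h3⟩
      · rw [List.mem_singleton] at hs'
        subst hs'
        obtain ⟨s'', g1, g2, g3⟩ := (hvis s' h2).1 hsvv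
        exact ⟨s'', g1, g2, ConnO_trans g3 h3⟩

theorem foldl_stepOuter_inv (land : List (List Int)) (l pre : List (Nat × Nat)) (st : List Int × List (List Bool))
    (hinv : OuterInv land pre st) : OuterInv land (pre ++ l) (l.foldl (stepOuter land) st) := by
  induction l generalizing pre st with
  | nil => simpa using hinv
  | cons a t ih =>
    have := ih (pre ++ [a]) (stepOuter land st a) (stepOuter_inv land pre st a hinv)
    simpa using this

def colL (land : List (List Int)) : List (Nat × Nat) :=
  (List.range (land.headD []).length).flatMap (fun x => (List.range land.length).map (fun y => (y, x)))

theorem mem_colL (land : List (List Int)) (p : Nat × Nat) :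
    p ∈ colL land ↔ p.1 < land.length ∧ p.2 < (land.headD []).length := by
  unfold colL
  simp only [List.mem_flatMap, List.mem_map, List.mem_range]
  constructor
  · rintro ⟨x, hx, y, hy, rfl⟩
    exact ⟨hy, hx⟩
  · rintro ⟨h1, h2⟩
    exact ⟨p.2, h2, p.1, h1, rfl⟩

theorem scan_flatten (land : List (List Int)) :
    (List.range (land.headD []).length).foldl (fun st x =>
      (List.range land.length).foldl (fun st y => outerStep land st y x) st)
      (List.replicate (land.headD []).length (0 : Int),
        List.replicate land.length (List.replicate (land.headD []).length false)) =
    (colL land).foldl (stepOuter land)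
      (List.replicate (land.headD []).length (0 : Int),
        List.replicate land.length (List.replicate (land.headD []).length false)) := by
  unfold colL
  rw [foldl_flatMap]
  simp only [List.foldl_map]
  rfl

theorem visAt_replicate (n m y x : Nat) :
    visAt (List.replicate n (List.replicate m false)) y x = if y < n ∧ x < m then false else true := by
  unfold visAt
  by_cases hy : y < n <;> by_cases hx : x < m <;>
    simp [List.getD, List.getElem?_replicate, hy, hx]

theorem solution_eq_spec (land : List (List Int)) (hpre : Pre_solution land) :
    solution land = pymax (specRes land) := by
  have hbase : OuterInv land []
      (List.replicate (land.headD []).length (0 : Int),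
        List.replicate land.length (List.replicate (land.headD []).length false)) := by
    have hnotvis : ∀ p : Nat × Nat, OilP land p →
        p ∉ VisS (List.replicate land.length (List.replicate (land.headD []).length false)) := by
      intro p hp hmem
      simp only [VisS, Set.mem_setOf_eq] at hmem
      rw [visAt_replicate, if_pos ⟨hp.1, hp.2.1⟩] at hmem
      exact Bool.false_ne_true hmem
    refine ⟨?_, by simp, ?_, ?_⟩
    · intro p hpo
      simp only [List.not_mem_nil, false_and, exists_false, iff_false]
      exact hnotvis p hpo
    · intro c hc
      have hempty : {p | OilP land p ∧
          p ∈ VisS (List.replicate land.length (List.replicate (land.headD []).length false)) ∧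
          TouchO land p c} = ∅ := by
        ext p
        simp only [Set.mem_setOf_eq, Set.mem_empty_iff_false, iff_false]
        rintro ⟨h1, h2, _⟩
        exact hnotvis p h1 h2
      rw [hempty]
      simp [List.getD_eq_getElem _ _ (by simpa using hc : c < (List.replicate (land.headD []).length (0 : Int)).length)]
    · intro y x hvf
      rw [visAt_replicate] at hvf
      by_contra hc
      rw [if_neg hc] at hvf
      simp at hvf
  have hinvf := foldl_stepOuter_inv land (colL land) []
    (List.replicate (land.headD []).length (0 : Int),
      List.replicate land.length (List.replicate (land.headD []).length false)) hbase
  rw [List.nil_append] at hinvf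
  obtain ⟨hvisf, hlenf, hresf, _⟩ := hinvf
  have hsol : solution land = pymax ((colL land).foldl (stepOuter land)
      (List.replicate (land.headD []).length (0 : Int),
        List.replicate land.length (List.replicate (land.headD []).length false))).1 := by
    unfold solution
    simp only [scan_flatten land]
  set fin := (colL land).foldl (stepOuter land)
      (List.replicate (land.headD []).length (0 : Int),
        List.replicate land.length (List.replicate (land.headD []).length false)) with hfin
  have hall : ∀ p, OilP land p → p ∈ VisS fin.2 := by
    intro p hpo
    exact (hvisf p hpo).2 ⟨p, (mem_colL land p).2 ⟨hpo.1, hpo.2.1⟩, hpo, Relation.ReflTransGen.refl⟩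
  have hsets : ∀ c : Nat, {p | OilP land p ∧ p ∈ VisS fin.2 ∧ TouchO land p c} =
      {p | OilP land p ∧ TouchO land p c} := by
    intro c
    ext p
    simp only [Set.mem_setOf_eq]
    constructor
    · rintro ⟨h1, _, h3⟩
      exact ⟨h1, h3⟩
    · rintro ⟨h1, h3⟩
      exact ⟨h1, hall p h1, h3⟩
  rw [hsol]
  congr 1
  apply List.ext_getElem
  · rw [hlenf]
    simp [specRes]
  · intro i h1 h2
    rw [← List.getD_eq_getElem _ 0 h1]
    rw [hresf i (by rw [← hlenf]; exact h1)]
    rw [hsets i]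
    simp only [specRes, specCol, List.getElem_map, List.getElem_range]

-- ---------- B side: union-find ----------

def UFok (parent : List Nat) (N : Nat) : Prop :=
  parent.length = N ∧ ∀ i, i < N → parent.getD i i ≤ i

theorem getD_set_ne (l : List Nat) (i j v : Nat) (h : i ≠ j) : (l.set i v).getD j j = l.getD j j := by
  simp [List.getD, List.getElem?_set_ne h]

theorem getD_set_self (l : List Nat) (j v : Nat) (hj : j < l.length) : (l.set j v).getD j j = v := by
  simp [List.getD, hj]

theorem ufFind_eq (parent : List Nat) (i : Nat) :
    ufFind parent i = if parent.getD i i < i then ufFind parent (parent.getD i i) else i := by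
  rw [ufFind]; rfl

theorem ufFind_le (parent : List Nat) (i : Nat) : ufFind parent i ≤ i := by
  induction i using Nat.strong_induction_on with
  | _ i ih =>
    rw [ufFind_eq]
    split
    · exact le_of_lt (lt_of_le_of_lt (ih _ (by assumption)) (by assumption))
    · exact le_refl i

theorem ufFind_isRoot (parent : List Nat) (N : Nat) (hok : UFok parent N) (i : Nat) (hi : i < N) :
    parent.getD (ufFind parent i) (ufFind parent i) = ufFind parent i := by
  induction i using Nat.strong_induction_on with
  | _ i ih =>
    rw [ufFind_eq]
    split
    · exact ih _ (by assumption) (by omega)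
    · have := hok.2 i hi
      omega

theorem ufFind_of_root (parent : List Nat) (i : Nat) (h : parent.getD i i = i) : ufFind parent i = i := by
  rw [ufFind_eq, h]; simp

-- effect of re-pointing root r2 to root r1
theorem ufFind_set (parent : List Nat) (N : Nat) (hok : UFok parent N) (r1 r2 : Nat)
    (h12 : r1 < r2) (h2N : r2 < N)
    (hr1 : parent.getD r1 r1 = r1) (hr2 : parent.getD r2 r2 = r2) :
    ∀ k, ufFind (parent.set r2 r1) k = if ufFind parent k = r2 then r1 else ufFind parent k := by
  intro k
  induction k using Nat.strong_induction_on with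
  | _ k ih =>
    have hlen : r2 < parent.length := hok.1 ▸ h2N
    by_cases hk2 : k = r2
    · subst hk2
      have h1 : (parent.set k r1).getD k k = r1 := getD_set_self parent k r1 hlen
      have h2 : (parent.set k r1).getD r1 r1 = r1 := by
        rw [getD_set_ne parent k r1 r1 (by omega)]
        exact hr1
      rw [ufFind_eq, h1, if_pos h12, ufFind_of_root _ _ h2, ufFind_of_root parent _ hr2]
      simp
    · have hgd : (parent.set r2 r1).getD k k = parent.getD k k :=
        getD_set_ne parent r2 k r1 (by omega)
      by_cases hpk : parent.getD k k < k
      · rw [ufFind_eq, hgd, if_pos hpk, ih _ hpk, ufFind_eq parent k, if_pos hpk]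
      · rw [ufFind_eq, hgd, if_neg hpk, ufFind_eq parent k, if_neg hpk, if_neg hk2]

theorem UFok_set (parent : List Nat) (N : Nat) (hok : UFok parent N) (r1 r2 : Nat)
    (h12 : r1 < r2) (h2N : r2 < N) : UFok (parent.set r2 r1) N := by
  obtain ⟨hlen, hle⟩ := hok
  refine ⟨by simpa using hlen, ?_⟩
  intro i hi
  by_cases hir : i = r2
  · rw [hir, getD_set_self parent r2 r1 (by omega)]
    omega
  · rw [getD_set_ne parent r2 i r1 (by omega)]
    exact hle i hi

theorem ufUnion_spec (parent : List Nat) (N : Nat) (hok : UFok parent N) (a b : Nat)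
    (ha : a < N) (hb : b < N) :
    UFok (ufUnion parent a b) N ∧
    ∀ i j, ufFind (ufUnion parent a b) i = ufFind (ufUnion parent a b) j ↔
      (ufFind parent i = ufFind parent j ∨
       (ufFind parent i = ufFind parent a ∧ ufFind parent j = ufFind parent b) ∨
       (ufFind parent i = ufFind parent b ∧ ufFind parent j = ufFind parent a)) := by
  have hra : ufFind parent a ≤ a := ufFind_le parent a
  have hrb : ufFind parent b ≤ b := ufFind_le parent b
  have hrootA := ufFind_isRoot parent N hok a ha
  have hrootB := ufFind_isRoot parent N hok b hb
  unfold ufUnion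
  dsimp only
  split_ifs with hab hlt
  · refine ⟨hok, fun i j => ?_⟩
    constructor
    · exact fun h => Or.inl h
    · intro h
      rcases h with h | ⟨h1, h2⟩ | ⟨h1, h2⟩ <;> omega
  · have hset := ufFind_set parent N hok _ _ hlt (by omega) hrootA hrootB
    refine ⟨UFok_set parent N hok _ _ hlt (by omega), fun i j => ?_⟩
    rw [hset i, hset j]
    split_ifs <;> omega
  · have hlt' : ufFind parent b < ufFind parent a := by omega
    have hset := ufFind_set parent N hok _ _ hlt' (by omega) hrootB hrootA
    refine ⟨UFok_set parent N hok _ _ hlt' (by omega), fun i j => ?_⟩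
    rw [hset i, hset j]
    split_ifs <;> omega

-- equivalence generated by a list of edges
def ERel (el : List (Nat × Nat)) (u v : Nat) : Prop := (u, v) ∈ el

theorem eqvGen_nil (u v : Nat) : Relation.EqvGen (ERel []) u v ↔ u = v := by
  constructor
  · intro h
    induction h with
    | rel _ _ h => exact absurd h (by simp [ERel])
    | refl => rfl
    | symm _ _ _ ih => omega
    | trans _ _ _ _ _ ih1 ih2 => omega
  · rintro rfl
    exact Relation.EqvGen.refl u

theorem eqvGen_mono (el : List (Nat × Nat)) (e : Nat × Nat) (u v : Nat)
    (h : Relation.EqvGen (ERel el) u v) : Relation.EqvGen (ERel (el ++ [e])) u v := by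
  induction h with
  | rel a b h => exact Relation.EqvGen.rel a b (by simp [ERel] at h ⊢; exact Or.inl h)
  | refl => exact Relation.EqvGen.refl _
  | symm _ _ _ ih => exact Relation.EqvGen.symm _ _ ih
  | trans _ _ _ _ _ ih1 ih2 => exact Relation.EqvGen.trans _ _ _ ih1 ih2

theorem eqvGen_append_one (el : List (Nat × Nat)) (a b u v : Nat) :
    Relation.EqvGen (ERel (el ++ [(a, b)])) u v ↔
      (Relation.EqvGen (ERel el) u v ∨
       (Relation.EqvGen (ERel el) u a ∧ Relation.EqvGen (ERel el) b v) ∨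
       (Relation.EqvGen (ERel el) u b ∧ Relation.EqvGen (ERel el) a v)) := by
  constructor
  · intro h
    induction h with
    | rel x y hxy =>
      simp only [ERel, List.mem_append, List.mem_singleton] at hxy
      rcases hxy with hxy | hxy
      · exact Or.inl (Relation.EqvGen.rel x y hxy)
      · rcases Prod.mk.injEq .. ▸ hxy with ⟨rfl, rfl⟩
        exact Or.inr (Or.inl ⟨Relation.EqvGen.refl _, Relation.EqvGen.refl _⟩)
    | refl => exact Or.inl (Relation.EqvGen.refl _)
    | symm x y _ ih =>
      rcases ih with h | ⟨h1, h2⟩ | ⟨h1, h2⟩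
      · exact Or.inl (Relation.EqvGen.symm _ _ h)
      · exact Or.inr (Or.inr ⟨Relation.EqvGen.symm _ _ h2, Relation.EqvGen.symm _ _ h1⟩)
      · exact Or.inr (Or.inl ⟨Relation.EqvGen.symm _ _ h2, Relation.EqvGen.symm _ _ h1⟩)
    | trans x y z _ _ ih1 ih2 =>
      rcases ih1 with h1 | ⟨h1a, h1b⟩ | ⟨h1a, h1b⟩ <;> rcases ih2 with h2 | ⟨h2a, h2b⟩ | ⟨h2a, h2b⟩
      · exact Or.inl (Relation.EqvGen.trans _ _ _ h1 h2)
      · exact Or.inr (Or.inl ⟨Relation.EqvGen.trans _ _ _ h1 h2a, h2b⟩)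
      · exact Or.inr (Or.inr ⟨Relation.EqvGen.trans _ _ _ h1 h2a, h2b⟩)
      · exact Or.inr (Or.inl ⟨h1a, Relation.EqvGen.trans _ _ _ h1b h2⟩)
      · exact Or.inr (Or.inl ⟨h1a, h2b⟩)
      · exact Or.inl (Relation.EqvGen.trans _ _ _ h1a h2b)
      · exact Or.inr (Or.inr ⟨h1a, Relation.EqvGen.trans _ _ _ h1b h2⟩)
      · exact Or.inl (Relation.EqvGen.trans _ _ _ h1a h2b)
      · exact Or.inr (Or.inr ⟨h1a, h2b⟩)
  · have hrel : Relation.EqvGen (ERel (el ++ [(a, b)])) a b :=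
      Relation.EqvGen.rel a b (by simp [ERel])
    rintro (h | ⟨h1, h2⟩ | ⟨h1, h2⟩)
    · exact eqvGen_mono el _ u v h
    · exact Relation.EqvGen.trans _ _ _ (eqvGen_mono el _ u a h1)
        (Relation.EqvGen.trans _ _ _ hrel (eqvGen_mono el _ b v h2))
    · exact Relation.EqvGen.trans _ _ _ (eqvGen_mono el _ u b h1)
        (Relation.EqvGen.trans _ _ _ (Relation.EqvGen.symm _ _ hrel) (eqvGen_mono el _ a v h2))

theorem uf_foldl_edges (N : Nat) (el : List (Nat × Nat)) (hel : ∀ e ∈ el, e.1 < N ∧ e.2 < N) :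
    UFok (el.foldl (fun par e => ufUnion par e.1 e.2) (List.range N)) N ∧
    ∀ i j, i < N → j < N →
      (ufFind (el.foldl (fun par e => ufUnion par e.1 e.2) (List.range N)) i =
       ufFind (el.foldl (fun par e => ufUnion par e.1 e.2) (List.range N)) j ↔
       Relation.EqvGen (ERel el) i j) := by
  induction el using List.reverseRecOn with
  | nil =>
    have hgd : ∀ i, i < N → (List.range N).getD i i = i := by
      intro i hi
      simp [List.getD, List.getElem?_range, hi]
    refine ⟨⟨List.length_range, fun i hi => le_of_eq (hgd i hi)⟩, fun i j hi hj => ?_⟩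
    simp only [List.foldl_nil]
    rw [eqvGen_nil, ufFind_of_root _ _ (hgd i hi), ufFind_of_root _ _ (hgd j hj)]
  | append_singleton el' e ih =>
    have hel' : ∀ e' ∈ el', e'.1 < N ∧ e'.2 < N := fun e' he' => hel e' (by simp [he'])
    obtain ⟨ha, hb⟩ := hel e (by simp)
    obtain ⟨hok, hiff⟩ := ih hel'
    obtain ⟨hok', hiff'⟩ := ufUnion_spec _ N hok e.1 e.2 ha hb
    simp only [List.foldl_append, List.foldl_cons, List.foldl_nil]
    refine ⟨hok', fun i j hi hj => ?_⟩
    rw [hiff' i j, eqvGen_append_one el' e.1 e.2 i j]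
    constructor
    · rintro (h | ⟨h1, h2⟩ | ⟨h1, h2⟩)
      · exact Or.inl ((hiff i j hi hj).1 h)
      · exact Or.inr (Or.inl ⟨(hiff i e.1 hi ha).1 h1, Relation.EqvGen.symm _ _ ((hiff j e.2 hj hb).1 h2)⟩)
      · exact Or.inr (Or.inr ⟨(hiff i e.2 hi hb).1 h1, Relation.EqvGen.symm _ _ ((hiff j e.1 hj ha).1 h2)⟩)
    · rintro (h | ⟨h1, h2⟩ | ⟨h1, h2⟩)
      · exact Or.inl ((hiff i j hi hj).2 h)
      · exact Or.inr (Or.inl ⟨(hiff i e.1 hi ha).2 h1, (hiff j e.2 hj hb).2 (Relation.EqvGen.symm _ _ h2)⟩)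
      · exact Or.inr (Or.inr ⟨(hiff i e.2 hi hb).2 h1, (hiff j e.1 hj ha).2 (Relation.EqvGen.symm _ _ h2)⟩)

-- ---------- B side: the edge list built by buildParent ----------

def encI (land : List (List Int)) (p : Nat × Nat) : Nat := p.1 * (land.headD []).length + p.2

def edgesOf (land : List (List Int)) (p : Nat × Nat) : List (Nat × Nat) :=
  (if p.2 + 1 < (land.headD []).length ∧ landAt land p.1 (p.2 + 1) ≠ 0 then
      [(encI land p, encI land p + 1)] else []) ++
  (if p.1 + 1 < land.length ∧ landAt land (p.1 + 1) p.2 ≠ 0 then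
      [(encI land p, encI land p + (land.headD []).length)] else [])

def posL (land : List (List Int)) : List (Nat × Nat) :=
  (List.range land.length).flatMap (fun y => (List.range (land.headD []).length).map (fun x => (y, x)))

def edgeL (land : List (List Int)) : List (Nat × Nat) :=
  (posL land).flatMap (fun p => if landAt land p.1 p.2 ≠ 0 then edgesOf land p else [])

theorem buildParent_eq (land : List (List Int)) :
    buildParent land land.length (land.headD []).length =
      (edgeL land).foldl (fun par e => ufUnion par e.1 e.2) (List.range (land.length * (land.headD []).length)) := by
  unfold buildParent edgeL posL
  rw [foldl_flatMap, foldl_flatMap]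
  simp only [List.foldl_map]
  congr 1
  funext par y
  congr 1
  funext par2 x
  show _ = (if landAt land y x ≠ 0 then edgesOf land (y, x) else []).foldl (fun par e => ufUnion par e.1 e.2) par2
  unfold edgesOf encI
  have harith : (y + 1) * (land.headD []).length + x = y * (land.headD []).length + x + (land.headD []).length := by
    ring
  split_ifs <;>
    simp only [List.foldl_append, List.foldl_cons, List.foldl_nil, List.nil_append,
      List.append_nil] <;> (try rw [harith]) <;> rfl

theorem mem_posL (land : List (List Int)) (p : Nat × Nat) :
    p ∈ posL land ↔ p.1 < land.length ∧ p.2 < (land.headD []).length := by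
  unfold posL
  simp only [List.mem_flatMap, List.mem_map, List.mem_range]
  constructor
  · rintro ⟨y, hy, x, hx, rfl⟩
    exact ⟨hy, hx⟩
  · rintro ⟨h1, h2⟩
    exact ⟨p.1, h1, p.2, h2, rfl⟩

theorem mem_edgeL (land : List (List Int)) (u v : Nat) :
    (u, v) ∈ edgeL land ↔
      ∃ p : Nat × Nat, OilP land p ∧ u = encI land p ∧
        ((v = u + 1 ∧ OilP land (p.1, p.2 + 1)) ∨
         (v = u + (land.headD []).length ∧ OilP land (p.1 + 1, p.2))) := by
  unfold edgeL edgesOf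
  simp only [List.mem_flatMap]
  constructor
  · rintro ⟨p, hpos, hmem⟩
    rw [mem_posL] at hpos
    by_cases hoil : landAt land p.1 p.2 ≠ 0
    · rw [if_pos hoil, List.mem_append] at hmem
      rcases hmem with hm | hm
      · split_ifs at hm with hc
        · simp only [List.mem_singleton, Prod.mk.injEq] at hm
          obtain ⟨rfl, rfl⟩ := hm
          exact ⟨p, ⟨hpos.1, hpos.2, hoil⟩, rfl, Or.inl ⟨rfl, hpos.1, hc.1, hc.2⟩⟩
        · simp at hm
      · split_ifs at hm with hc
        · simp only [List.mem_singleton, Prod.mk.injEq] at hm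
          obtain ⟨rfl, rfl⟩ := hm
          exact ⟨p, ⟨hpos.1, hpos.2, hoil⟩, rfl, Or.inr ⟨rfl, hc.1, hpos.2, hc.2⟩⟩
        · simp at hm
    · rw [if_neg hoil] at hmem
      simp at hmem
  · rintro ⟨p, hp, rfl, hcase⟩
    refine ⟨p, (mem_posL land p).2 ⟨hp.1, hp.2.1⟩, ?_⟩
    rw [if_pos hp.2.2, List.mem_append]
    rcases hcase with ⟨rfl, hq⟩ | ⟨rfl, hq⟩
    · left
      rw [if_pos ⟨hq.2.1, hq.2.2⟩]
      simp
    · right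
      rw [if_pos ⟨hq.1, hq.2.2⟩]
      simp

theorem encI_lt (land : List (List Int)) (p : Nat × Nat)
    (h1 : p.1 < land.length) (h2 : p.2 < (land.headD []).length) :
    encI land p < land.length * (land.headD []).length := by
  unfold encI
  have h3 : (p.1 + 1) * (land.headD []).length ≤ land.length * (land.headD []).length :=
    Nat.mul_le_mul_right _ h1
  have h4 : (p.1 + 1) * (land.headD []).length = p.1 * (land.headD []).length + (land.headD []).length := by
    ring
  omega

theorem encI_inj (land : List (List Int)) (p q : Nat × Nat)
    (hp : p.2 < (land.headD []).length) (hq : q.2 < (land.headD []).length)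
    (h : encI land p = encI land q) : p = q := by
  unfold encI at h
  rcases Nat.lt_trichotomy p.1 q.1 with hlt | heq | hlt
  · exfalso
    have h3 : (p.1 + 1) * (land.headD []).length ≤ q.1 * (land.headD []).length :=
      Nat.mul_le_mul_right _ hlt
    have h4 : (p.1 + 1) * (land.headD []).length = p.1 * (land.headD []).length + (land.headD []).length := by
      ring
    omega
  · have : p.2 = q.2 := by rw [heq] at h; omega
    exact Prod.ext heq this
  · exfalso
    have h3 : (q.1 + 1) * (land.headD []).length ≤ p.1 * (land.headD []).length :=
      Nat.mul_le_mul_right _ hlt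
    have h4 : (q.1 + 1) * (land.headD []).length = q.1 * (land.headD []).length + (land.headD []).length := by
      ring
    omega

theorem conn_of_eqvGen (land : List (List Int)) : ∀ u v, Relation.EqvGen (ERel (edgeL land)) u v →
    u = v ∨ ∃ p' q', OilP land p' ∧ OilP land q' ∧ u = encI land p' ∧ v = encI land q' ∧ ConnO land p' q' := by
  intro u v h
  induction h with
  | rel x y hxy =>
    obtain ⟨p, hp, rfl, hc⟩ := (mem_edgeL land x y).1 hxy
    right
    rcases hc with ⟨rfl, hq⟩ | ⟨rfl, hq⟩
    · refine ⟨p, (p.1, p.2 + 1), hp, hq, rfl, by unfold encI; dsimp only; omega, ?_⟩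
      exact Relation.ReflTransGen.single ⟨hp, hq, Or.inl ⟨rfl, Or.inl rfl⟩⟩
    · refine ⟨p, (p.1 + 1, p.2), hp, hq, rfl, by unfold encI; dsimp only; ring, ?_⟩
      exact Relation.ReflTransGen.single ⟨hp, hq, Or.inr ⟨rfl, Or.inl rfl⟩⟩
  | refl => exact Or.inl rfl
  | symm x y _ ih =>
    rcases ih with h | ⟨p', q', h1, h2, h3, h4, h5⟩
    · exact Or.inl h.symm
    · exact Or.inr ⟨q', p', h2, h1, h4, h3, ConnO_symm h5⟩
  | trans x y z _ _ ih1 ih2 =>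
    rcases ih1 with h | ⟨p', q', h1, h2, h3, h4, h5⟩
    · rcases ih2 with h' | h' 
      · exact Or.inl (h.trans h')
      · rw [h]; exact Or.inr h'
    · rcases ih2 with h' | ⟨p'', q'', g1, g2, g3, g4, g5⟩
      · rw [← h']; exact Or.inr ⟨p', q', h1, h2, h3, h4, h5⟩
      · have : q' = p'' := encI_inj land q' p'' h2.2.1 g1.2.1 (h4 ▸ g3)
        exact Or.inr ⟨p', q'', h1, g2, h3, g4, ConnO_trans h5 (this ▸ g5)⟩

theorem eqvGen_of_adj (land : List (List Int)) (b c : Nat × Nat) (h : AdjO land b c) :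
    Relation.EqvGen (ERel (edgeL land)) (encI land b) (encI land c) := by
  obtain ⟨hb, hc, hnbr⟩ := h
  rcases hnbr with ⟨h1, h2 | h2⟩ | ⟨h1, h2 | h2⟩
  · have hcc : c = (b.1, b.2 + 1) := Prod.ext_iff.2 ⟨h1.symm, h2.symm⟩
    subst hcc
    refine Relation.EqvGen.rel _ _ ((mem_edgeL land _ _).2 ?_)
    exact ⟨b, hb, rfl, Or.inl ⟨by unfold encI; dsimp only; omega, hc⟩⟩
  · have hbb : b = (c.1, c.2 + 1) := Prod.ext_iff.2 ⟨h1, h2.symm⟩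
    subst hbb
    refine Relation.EqvGen.symm _ _ (Relation.EqvGen.rel _ _ ((mem_edgeL land _ _).2 ?_))
    exact ⟨c, hc, rfl, Or.inl ⟨by unfold encI; dsimp only; omega, hb⟩⟩
  · have hcc : c = (b.1 + 1, b.2) := Prod.ext_iff.2 ⟨h2.symm, h1.symm⟩
    subst hcc
    refine Relation.EqvGen.rel _ _ ((mem_edgeL land _ _).2 ?_)
    exact ⟨b, hb, rfl, Or.inr ⟨by unfold encI; dsimp only; ring, hc⟩⟩
  · have hbb : b = (c.1 + 1, c.2) := Prod.ext_iff.2 ⟨h2.symm, h1⟩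
    subst hbb
    refine Relation.EqvGen.symm _ _ (Relation.EqvGen.rel _ _ ((mem_edgeL land _ _).2 ?_))
    exact ⟨c, hc, rfl, Or.inr ⟨by unfold encI; dsimp only; ring, hb⟩⟩

theorem eqvGen_of_conn (land : List (List Int)) (p q : Nat × Nat) (h : ConnO land p q) :
    Relation.EqvGen (ERel (edgeL land)) (encI land p) (encI land q) := by
  induction h with
  | refl => exact Relation.EqvGen.refl _
  | tail _ hadj ih => exact Relation.EqvGen.trans _ _ _ ih (eqvGen_of_adj land _ _ hadj)

theorem edgeL_bounds (land : List (List Int)) :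
    ∀ e ∈ edgeL land, e.1 < land.length * (land.headD []).length ∧
      e.2 < land.length * (land.headD []).length := by
  rintro ⟨u, v⟩ he
  obtain ⟨p, hp, rfl, hc⟩ := (mem_edgeL land u v).1 he
  refine ⟨encI_lt land p hp.1 hp.2.1, ?_⟩
  rcases hc with ⟨rfl, hq⟩ | ⟨rfl, hq⟩
  · have := encI_lt land (p.1, p.2 + 1) hq.1 hq.2.1
    unfold encI at this ⊢
    dsimp only at this
    omega
  · have := encI_lt land (p.1 + 1, p.2) hq.1 hq.2.1
    have h4 : (p.1 + 1) * (land.headD []).length = p.1 * (land.headD []).length + (land.headD []).length := by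
      ring
    unfold encI at this ⊢
    dsimp only at this
    omega

-- the find-equality of the built structure is exactly oil connectivity
theorem find_eq_iff_conn (land : List (List Int)) (p q : Nat × Nat)
    (hp : OilP land p) (hq : OilP land q) :
    (ufFind (buildParent land land.length (land.headD []).length) (encI land p) =
     ufFind (buildParent land land.length (land.headD []).length) (encI land q)) ↔ ConnO land p q := by
  obtain ⟨hok, hiff⟩ := uf_foldl_edges (land.length * (land.headD []).length) (edgeL land) (edgeL_bounds land)
  rw [buildParent_eq]
  rw [hiff _ _ (encI_lt land p hp.1 hp.2.1) (encI_lt land q hq.1 hq.2.1)]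
  constructor
  · intro h
    rcases conn_of_eqvGen land _ _ h with heq | ⟨p', q', h1, h2, h3, h4, h5⟩
    · rw [encI_inj land p q hp.2.1 hq.2.1 heq]
      exact Relation.ReflTransGen.refl
    · have e1 := encI_inj land p p' hp.2.1 h1.2.1 h3
      have e2 := encI_inj land q q' hq.2.1 h2.2.1 h4
      rw [e1, e2]
      exact h5
  · exact eqvGen_of_conn land p q

-- ---------- B side: grouping pass and per-column sums ----------

def rootP (land : List (List Int)) (p : Nat × Nat) : Nat :=
  ufFind (buildParent land land.length (land.headD []).length) (encI land p)

def oilL (land : List (List Int)) : List (Nat × Nat) :=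
  (posL land).filter (fun p => decide (landAt land p.1 p.2 ≠ 0))

theorem posL_nodup (land : List (List Int)) : (posL land).Nodup := by
  unfold posL
  rw [List.nodup_flatMap]
  constructor
  · intro y _
    exact List.nodup_range.map (fun a b h => by injection h)
  · refine List.Pairwise.imp ?_ (List.pairwise_lt_range)
    intro y1 y2 hlt p h1 h2
    simp only [List.mem_map] at h1 h2
    obtain ⟨x1, _, rfl⟩ := h1
    obtain ⟨x2, _, h⟩ := h2
    injection h with h1' h2'
    omega

theorem mem_oilL (land : List (List Int)) (p : Nat × Nat) : p ∈ oilL land ↔ OilP land p := by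
  unfold oilL OilP
  rw [List.mem_filter, mem_posL]
  simp [and_assoc]

theorem oilL_nodup (land : List (List Int)) : (oilL land).Nodup :=
  (posL_nodup land).filter _

def gstep (land : List (List Int)) (st : GSt) (p : Nat × Nat) : GSt :=
  let r := rootP land p
  (st.1.insert r (st.1.getD r 0 + 1), st.2.insert r ((st.2.getD r PySem.Set.empty).add p.2))

def grpv (land : List (List Int)) : GSt :=
  (oilL land).foldl (gstep land)
    ((PySem.Dict.empty : PySem.Dict Nat Int), (PySem.Dict.empty : PySem.Dict Nat (PySem.Set Nat)))

theorem grp_flatten (land : List (List Int)) :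
    (List.range land.length).foldl (fun st y =>
      (List.range (land.headD []).length).foldl (fun st x =>
        grpStep land (buildParent land land.length (land.headD []).length) (land.headD []).length st y x) st)
      ((PySem.Dict.empty : PySem.Dict Nat Int), (PySem.Dict.empty : PySem.Dict Nat (PySem.Set Nat))) =
    grpv land := by
  unfold grpv oilL
  rw [List.foldl_filter]
  unfold posL
  rw [foldl_flatMap]
  simp only [List.foldl_map]
  congr 1
  funext st y
  congr 1
  funext st x
  show grpStep land _ _ st y x = if decide (landAt land y x ≠ 0) = true then gstep land st (y, x) else st
  simp only [decide_eq_true_eq]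
  unfold grpStep gstep rootP encI
  rfl

def ClassN (land : List (List Int)) (r : Nat) : Set (Nat × Nat) := {p | OilP land p ∧ rootP land p = r}

def ColS (land : List (List Int)) (r : Nat) : Set Nat := {x | ∃ q, OilP land q ∧ rootP land q = r ∧ q.2 = x}

def GInv (land : List (List Int)) (T : List (Nat × Nat)) (st : GSt) : Prop :=
  (∀ r : Nat, st.1.getD r 0 = ((T.filter (fun p => rootP land p == r)).length : Int)) ∧
  (∀ r : Nat, r ∈ st.1.keys ↔ ∃ p ∈ T, rootP land p = r) ∧
  st.1.keys.Nodup ∧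
  (∀ r c : Nat, c ∈ st.2.getD r PySem.Set.empty ↔ ∃ p ∈ T, rootP land p = r ∧ p.2 = c) ∧
  (∀ r : Nat, (st.2.getD r PySem.Set.empty).Nodup)

theorem gstep_inv (land : List (List Int)) (T : List (Nat × Nat)) (st : GSt) (p : Nat × Nat)
    (h : GInv land T st) : GInv land (T ++ [p]) (gstep land st p) := by
  obtain ⟨h1, h2, h3, h4, h5⟩ := h
  unfold gstep
  refine ⟨?_, ?_, ?_, ?_, ?_⟩
  · intro r
    by_cases hr : r = rootP land p
    · subst hr
      rw [PySem.Dict.getD_insert_self, h1, List.filter_append]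
      simp
    · rw [PySem.Dict.getD_insert_of_ne _ _ _ hr, h1, List.filter_append]
      have hb : (rootP land p == r) = false := by
        rw [beq_eq_false_iff_ne]
        exact fun hc => hr hc.symm
      simp [hb]
  · intro r
    rw [PySem.Dict.mem_keys_insert, h2]
    constructor
    · rintro (rfl | ⟨q, hq, hr⟩)
      · exact ⟨p, by simp, rfl⟩
      · exact ⟨q, by simp [hq], hr⟩
    · rintro ⟨q, hq, hr⟩
      simp only [List.mem_append, List.mem_singleton] at hq
      rcases hq with hq | rfl
      · exact Or.inr ⟨q, hq, hr⟩
      · exact Or.inl hr.symm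
  · exact PySem.Dict.nodup_keys_insert _ _ _ h3
  · intro r c
    by_cases hr : r = rootP land p
    · subst hr
      rw [PySem.Dict.getD_insert_self, PySem.Set.mem_add, h4]
      constructor
      · rintro (⟨q, hq, hr, hc⟩ | rfl)
        · exact ⟨q, by simp [hq], hr, hc⟩
        · exact ⟨p, by simp, rfl, rfl⟩
      · rintro ⟨q, hq, hr, hc⟩
        simp only [List.mem_append, List.mem_singleton] at hq
        rcases hq with hq | rfl
        · exact Or.inl ⟨q, hq, hr, hc⟩
        · exact Or.inr hc.symm
    · rw [PySem.Dict.getD_insert_of_ne _ _ _ hr, h4]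
      constructor
      · rintro ⟨q, hq, hrr, hc⟩
        exact ⟨q, by simp [hq], hrr, hc⟩
      · rintro ⟨q, hq, hrr, hc⟩
        simp only [List.mem_append, List.mem_singleton] at hq
        rcases hq with hq | rfl
        · exact ⟨q, hq, hrr, hc⟩
        · exact absurd hrr.symm hr
  · intro r
    by_cases hr : r = rootP land p
    · subst hr
      rw [PySem.Dict.getD_insert_self]
      exact PySem.Set.nodup_add _ _ (h5 _)
    · rw [PySem.Dict.getD_insert_of_ne _ _ _ hr]
      exact h5 r

theorem gfold_inv (land : List (List Int)) (l T : List (Nat × Nat)) (st : GSt)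
    (h : GInv land T st) : GInv land (T ++ l) (l.foldl (gstep land) st) := by
  induction l generalizing T st with
  | nil => simpa using h
  | cons a t ih =>
    have := ih (T ++ [a]) (gstep land st a) (gstep_inv land T st a h)
    simpa using this

theorem grpv_inv (land : List (List Int)) : GInv land (oilL land) (grpv land) := by
  have hbase : GInv land []
      ((PySem.Dict.empty : PySem.Dict Nat Int), (PySem.Dict.empty : PySem.Dict Nat (PySem.Set Nat))) := by
    refine ⟨?_, ?_, ?_, ?_, ?_⟩ <;> simp [PySem.Dict.getD_empty, PySem.Dict.keys_empty]
  simpa using gfold_inv land (oilL land) [] _ hbase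

theorem colS_touch (land : List (List Int)) (p : Nat × Nat) (hp : OilP land p) (c : Nat) :
    c ∈ ColS land (rootP land p) ↔ TouchO land p c := by
  constructor
  · rintro ⟨q, hq, hr, hc⟩
    exact ⟨q, hq, (find_eq_iff_conn land p q hp hq).1 hr.symm, hc⟩
  · rintro ⟨q, hq, hconn, hc⟩
    exact ⟨q, hq, ((find_eq_iff_conn land p q hp hq).2 hconn).symm, hc⟩

theorem inner_fold (cs : List Nat) (res : List Int) (s : Int) (hnd : cs.Nodup)
    (hlt : ∀ c ∈ cs, c < res.length) :
    (cs.foldl (fun res c => res.modify c (fun v => v + s)) res).length = res.length ∧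
    ∀ c : Nat, (cs.foldl (fun res c => res.modify c (fun v => v + s)) res).getD c 0 =
      res.getD c 0 + (if c ∈ cs then s else 0) := by
  induction cs generalizing res with
  | nil => simp
  | cons a t ih =>
    rw [List.nodup_cons] at hnd
    have hlen : (res.modify a (fun v => v + s)).length = res.length := by simp
    obtain ⟨ihl, ihg⟩ := ih (res.modify a (fun v => v + s)) hnd.2
      (fun c hc => hlen ▸ hlt c (by simp [hc]))
    refine ⟨by rw [List.foldl_cons, ihl, hlen], ?_⟩
    intro c
    rw [List.foldl_cons, ihg c]
    by_cases hca : c = a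
    · subst hca
      rw [getD_modify_self res c _ (hlt c (by simp))]
      have hct : c ∉ t := hnd.1
      simp [hct]
    · rw [getD_modify_ne res a c _ hca]
      simp [hca]

theorem outer_fold (land : List (List Int)) (colsD : Nat → List Nat)
    (its : List (Nat × Int)) (res : List Int)
    (hkeys : (its.map Prod.fst).Nodup)
    (hval : ∀ rs ∈ its, rs.2 = (Set.ncard (ClassN land rs.1) : Int))
    (hcols : ∀ rs ∈ its, (∀ c : Nat, c ∈ colsD rs.1 ↔ c ∈ ColS land rs.1) ∧ (colsD rs.1).Nodup ∧
        ∀ c ∈ colsD rs.1, c < res.length) :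
    (its.foldl (fun res rs => (colsD rs.1).foldl (fun res c => res.modify c (fun v => v + rs.2)) res) res).length = res.length ∧
    ∀ c : Nat, c < res.length →
      (its.foldl (fun res rs => (colsD rs.1).foldl (fun res c => res.modify c (fun v => v + rs.2)) res) res).getD c 0 =
        res.getD c 0 +
          (Set.ncard {p | OilP land p ∧ rootP land p ∈ its.map Prod.fst ∧ c ∈ ColS land (rootP land p)} : Int) := by
  classical
  induction its generalizing res with
  | nil => simp
  | cons rs t ih =>
    rw [List.map_cons, List.nodup_cons] at hkeys
    obtain ⟨hmem, hnd1, hbd⟩ := hcols rs (by simp)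
    obtain ⟨il, ig⟩ := inner_fold (colsD rs.1) res rs.2 hnd1 hbd
    obtain ⟨ihl, ihg⟩ := ih ((colsD rs.1).foldl (fun res c => res.modify c (fun v => v + rs.2)) res)
      hkeys.2 (fun x hx => hval x (List.mem_cons_of_mem _ hx))
      (fun x hx => by
        obtain ⟨a, b, c⟩ := hcols x (List.mem_cons_of_mem _ hx)
        exact ⟨a, b, fun d hd => il ▸ c d hd⟩)
    refine ⟨by rw [List.foldl_cons, ihl, il], ?_⟩
    intro c hc
    rw [List.foldl_cons, ihg c (il ▸ hc), ig c, List.map_cons]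
    have hfin : ∀ S : Set (Nat × Nat), (∀ p ∈ S, OilP land p) → S.Finite := oil_finite land
    have hsplit :
        {p | OilP land p ∧ rootP land p ∈ rs.1 :: t.map Prod.fst ∧ c ∈ ColS land (rootP land p)} =
        (if c ∈ ColS land rs.1 then ClassN land rs.1 else ∅) ∪
          {p | OilP land p ∧ rootP land p ∈ t.map Prod.fst ∧ c ∈ ColS land (rootP land p)} := by
      ext p
      split_ifs with hcC
      · simp only [Set.mem_union, Set.mem_setOf_eq, List.mem_cons, ClassN]
        constructor
        · rintro ⟨hp, hr | hr, hcc⟩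
          · exact Or.inl ⟨hp, hr⟩
          · exact Or.inr ⟨hp, hr, hcc⟩
        · rintro (⟨hp, hr⟩ | ⟨hp, hr, hcc⟩)
          · exact ⟨hp, Or.inl hr, hr ▸ hcC⟩
          · exact ⟨hp, Or.inr hr, hcc⟩
      · simp only [Set.mem_union, Set.mem_setOf_eq, List.mem_cons, Set.mem_empty_iff_false, false_or]
        constructor
        · rintro ⟨hp, hr | hr, hcc⟩
          · exact absurd (hr ▸ hcc) hcC
          · exact ⟨hp, hr, hcc⟩
        · rintro ⟨hp, hr, hcc⟩
          exact ⟨hp, Or.inr hr, hcc⟩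
    rw [hsplit]
    have hdisj : Disjoint (if c ∈ ColS land rs.1 then ClassN land rs.1 else ∅)
        {p | OilP land p ∧ rootP land p ∈ t.map Prod.fst ∧ c ∈ ColS land (rootP land p)} := by
      split_ifs
      · rw [Set.disjoint_left]
        rintro p ⟨_, hr⟩ ⟨_, hr2, _⟩
        exact hkeys.1 (hr ▸ hr2)
      · exact Set.empty_disjoint _
    have hfin1 : (if c ∈ ColS land rs.1 then ClassN land rs.1 else ∅).Finite := by
      split_ifs
      · exact hfin _ (fun p hp => hp.1)
      · exact Set.finite_empty
    rw [Set.ncard_union_eq hdisj hfin1 (hfin _ (fun p hp => hp.1))]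
    rw [hval rs (List.mem_cons_self ..), if_congr (hmem c) rfl rfl]
    split_ifs with hcc
    · push_cast
      ring
    · simp

theorem solution_alt_eq_spec (land : List (List Int)) (hpre : Pre_solution land) :
    solution_alt land = pymax (specRes land) := by
  have hz : solution_alt land = pymax
      ((grpv land).1.items.foldl (fun res rs =>
        ((grpv land).2.getD rs.1 PySem.Set.empty).foldl (fun res c => res.modify c (fun v => v + rs.2)) res)
        (List.replicate (land.headD []).length (0 : Int))) := by
    unfold solution_alt
    simp only [grp_flatten land]
  obtain ⟨hsz, hkeys, hknd, hcols, hcnd⟩ := grpv_inv land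
  have hkeyseq : ((grpv land).1.items.map Prod.fst) = (grpv land).1.keys := by
    simp [PySem.Dict.keys]
  have hval : ∀ rs ∈ (grpv land).1.items, rs.2 = (Set.ncard (ClassN land rs.1) : Int) := by
    rintro ⟨r, v⟩ hrs
    have hget := PySem.Dict.getD_of_mem_items _ hrs hknd (0 : Int)
    rw [hsz r] at hget
    rw [← hget]
    congr 1
    rw [ncard_eq_length ((oilL land).filter (fun p => rootP land p == r)) (ClassN land r)
      (List.Nodup.filter _ (oilL_nodup land)) ?_]
    intro p
    rw [List.mem_filter, mem_oilL]
    simp only [beq_iff_eq]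
    exact Iff.rfl
  have hcolsfact : ∀ rs ∈ (grpv land).1.items,
      (∀ c : Nat, c ∈ (grpv land).2.getD rs.1 PySem.Set.empty ↔ c ∈ ColS land rs.1) ∧
      ((grpv land).2.getD rs.1 PySem.Set.empty).Nodup ∧
      ∀ c ∈ (grpv land).2.getD rs.1 PySem.Set.empty,
        c < (List.replicate (land.headD []).length (0 : Int)).length := by
    intro rs _
    refine ⟨?_, hcnd rs.1, ?_⟩
    · intro c
      rw [hcols rs.1 c]
      constructor
      · rintro ⟨p, hp, hr, hc⟩
        exact ⟨p, (mem_oilL land p).1 hp, hr, hc⟩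
      · rintro ⟨p, hp, hr, hc⟩
        exact ⟨p, (mem_oilL land p).2 hp, hr, hc⟩
    · intro c hc
      obtain ⟨p, hp, _, hc2⟩ := (hcols rs.1 c).1 hc
      have h2 := ((mem_oilL land p).1 hp).2.1
      simp only [List.length_replicate]
      omega
  obtain ⟨hlen, hget⟩ := outer_fold land (fun r => (grpv land).2.getD r PySem.Set.empty)
    (grpv land).1.items (List.replicate (land.headD []).length (0 : Int))
    (hkeyseq ▸ hknd) hval hcolsfact
  rw [hz]
  congr 1
  apply List.ext_getElem
  · rw [hlen]
    simp [specRes]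
  · intro i h1 h2
    rw [← List.getD_eq_getElem _ 0 h1]
    have hi : i < (List.replicate (land.headD []).length (0 : Int)).length := by
      rw [hlen] at h1
      exact h1
    rw [hget i hi]
    have hrep : (List.replicate (land.headD []).length (0 : Int)).getD i 0 = 0 := by
      rw [List.getD_eq_getElem _ 0 hi]
      simp
    rw [hrep]
    have hseteq : {p | OilP land p ∧ rootP land p ∈ (grpv land).1.items.map Prod.fst ∧
        i ∈ ColS land (rootP land p)} = {p | OilP land p ∧ TouchO land p i} := by
      ext p
      simp only [Set.mem_setOf_eq]
      constructor
      · rintro ⟨hp, _, hcc⟩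
        exact ⟨hp, (colS_touch land p hp i).1 hcc⟩
      · rintro ⟨hp, ht⟩
        refine ⟨hp, ?_, (colS_touch land p hp i).2 ht⟩
        rw [hkeyseq]
        exact (hkeys (rootP land p)).2 ⟨p, (mem_oilL land p).2 hp, rfl⟩
    rw [hseteq]
    simp only [specRes, specCol, List.getElem_map, List.getElem_range, zero_add]

theorem solution_eq_alt (land : List (List Int)) (hpre : Pre_solution land) :
    solution land = solution_alt land := by
  rw [solution_eq_spec land hpre, solution_alt_eq_spec land hpre]

-- ===== VERDICT (by name: the statement is the Claim_ definition above) =====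
theorem solution_spec : Claim_equal_solution := by
  intro land _ hpre
  unfold Spec_solution
  exact solution_eq_alt land hpre
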